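-- pv_equiv track=rewrite | github.com/da-in/algorithm-study | Programmers - 문제풀이/무인도 여행/jamin.py | solution
-- ===== SOURCE A (Python) =====
-- from collections import deque
--
-- dx = [-1,1,0,0]
--
-- dy = [0,0,-1,1]
--
-- def bfs(maps, col, row, i, j, visited):
--     visited[i][j] = True
--     q = deque()
--     q.append([i,j])
--     num = 0
--
--     while q:
--         c, r = q.popleft()
--         num += int(maps[c][r])
--
--         for k in range(4):
--             x = c + dx[k]
--             y = r + dy[k]
--
--
--             if 0<=x<col and 0<=y<row:
--                 if not visited[x][y] and maps[x][y] != 'X':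
--                     visited[x][y] = True
--                     q.append([x,y])
--
--             else:
--                 continue
--     return num
--
-- def solution(maps):
--     answer = []
--
--     for i in range(len(maps)):
--         maps[i] = list(maps[i]) # 2차원 배열로 재선언
--
--     col = len(maps) #4 세로!!
--     row = len(maps[0])  #5 가로!!
--
--     visited = [[False]*row for _ in range(col)]
--
--     for i in range(col):
--         for j in range(row):
--             if not visited[i][j] and maps[i][j] != 'X':
--                 answer.append(bfs(maps, col, row, i, j, visited))
--
--
--     if answer:
--         answer.sort()
--     else:
--         answer = [-1]
--
--     return answer
-- ===== SOURCE B (Python) =====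
-- def solution(maps):
--     for i in range(len(maps)):
--         maps[i] = list(maps[i])  # keep A's observable in-place row conversion
--     col = len(maps)
--     row = len(maps[0])
--     n = col * row
--     parent = list(range(n))
--
--     def find(a):
--         while parent[a] != a:
--             a = parent[a]
--         return a
--
--     def union(a, b):
--         ra = find(a)
--         rb = find(b)
--         if ra != rb:
--             parent[ra] = rb
--
--     for i in range(col):
--         for j in range(row):
--             if maps[i][j] == 'X':
--                 continue
--             if i + 1 < col and maps[i + 1][j] != 'X':
--                 union(i * row + j, (i + 1) * row + j)
--             if j + 1 < row and maps[i][j + 1] != 'X':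
--                 union(i * row + j, i * row + j + 1)
--
--     sums = {}
--     for i in range(col):
--         for j in range(row):
--             if maps[i][j] != 'X':
--                 r = find(i * row + j)
--                 sums[r] = sums.get(r, 0) + int(maps[i][j])
--
--     answer = sorted(sums.values())
--     return answer if answer else [-1]
-- ===== Notes on version B (the rewrite author's own statement) =====
-- stated objective: alternative
-- what changed: Replaces BFS flood fill with a disjoint-set union (union-find): a parent array over flattened cell ids is built by unioning each land cell with its right/down land neighbours, then island sums are accumulated in a dict keyed by each cell's root and the dict values are sorted; B mutates maps rows to lists like A.
import Mathlib
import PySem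

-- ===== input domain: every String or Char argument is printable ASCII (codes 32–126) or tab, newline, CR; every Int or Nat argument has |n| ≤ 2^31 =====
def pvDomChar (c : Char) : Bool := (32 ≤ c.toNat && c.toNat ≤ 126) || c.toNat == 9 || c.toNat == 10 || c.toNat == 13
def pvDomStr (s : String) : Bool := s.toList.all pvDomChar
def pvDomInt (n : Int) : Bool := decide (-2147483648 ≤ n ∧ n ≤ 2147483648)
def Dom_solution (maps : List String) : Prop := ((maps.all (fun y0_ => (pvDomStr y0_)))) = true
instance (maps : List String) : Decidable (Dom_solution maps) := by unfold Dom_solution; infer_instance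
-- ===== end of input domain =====

-- B replaces A's BFS flood fill by a union-find (disjoint-set) pass over flattened cell ids plus
-- a dict of per-root sums; equal return value proved (both mutate the argument rows to lists in
-- Python, which the proof — about return values — does not model).

-- shared low-level helpers (used by both ports)

-- int(ch) on the 1-char string ch; the `.getD 0` default is only reached where Python raises
-- ValueError, and such inputs are excluded by Pre_solution
def charVal (c : Char) : Int := (PySem.Int.ofStr? (String.mk [c])).getD 0

-- maps[c][r]; whenever accessed, the indices are nonnegative and in range under Pre_solution,
-- so the defaults are never reached there
def cellChar (g : List (List Char)) (c r : Int) : Char := (g.getD c.toNat []).getD r.toNat 'X'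

-- ===== PORT A =====

def dxA : List Int := [-1, 1, 0, 0]
def dyA : List Int := [0, 0, -1, 1]

-- visited[x][y]; indices checked nonnegative and in range before every access
def visGet (vis : List (List Bool)) (x y : Int) : Bool := (vis.getD x.toNat []).getD y.toNat false

-- visited[x][y] = True
def visSet (vis : List (List Bool)) (x y : Int) : List (List Bool) :=
  vis.set x.toNat ((vis.getD x.toNat []).set y.toNat true)

-- body of `for k in range(4): …` in bfs
def bfsStep (g : List (List Char)) (col row c r : Int)
    (st : List (Int × Int) × List (List Bool)) (k : Nat) : List (Int × Int) × List (List Bool) :=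
  let x := c + dxA.getD k 0
  let y := r + dyA.getD k 0
  if 0 ≤ x ∧ x < col ∧ 0 ≤ y ∧ y < row then
    if visGet st.2 x y = false ∧ cellChar g x y ≠ 'X' then
      (st.1 ++ [(x, y)], visSet st.2 x y)
    else st
  else st

-- the `while q:` loop of bfs; fuel is only a totality guard (solution passes enough fuel)
def bfsA (g : List (List Char)) (col row : Int) :
    Nat → List (Int × Int) → List (List Bool) → Int → Int × List (List Bool)
  | 0, _, vis, num => (num, vis)
  | _ + 1, [], vis, num => (num, vis)
  | fuel + 1, (c, r) :: q, vis, num =>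
      let num' := num + charVal (cellChar g c r)
      let st := (List.range 4).foldl (bfsStep g col row c r) (q, vis)
      bfsA g col row fuel st.1 st.2 num'

def solution (maps : List String) : List Int :=
  let g := maps.map String.toList                -- maps[i] = list(maps[i])
  let col : Int := g.length
  let row : Int := (g.headD []).length           -- len(maps[0]); [] raises in Python, excluded by Pre_
  let res := (List.range g.length).foldl (fun st (i : Nat) =>
      (List.range (g.headD []).length).foldl (fun (st : List Int × List (List Bool)) (j : Nat) =>
        if visGet st.2 (i : Int) (j : Int) = false ∧ cellChar g (i : Int) (j : Int) ≠ 'X' then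
          -- bfs marks visited[i][j] and starts from queue [[i,j]] with num = 0
          let out := bfsA g col row (g.length * (g.headD []).length + 1)
              [((i : Int), (j : Int))] (visSet st.2 (i : Int) (j : Int)) 0
          (st.1 ++ [out.1], out.2)
        else st) st)
    ([], List.replicate g.length (List.replicate (g.headD []).length false))
  if res.1 = [] then [-1] else PySem.List.sorted res.1 (fun x => x)

-- ===== PORT B =====

-- find(a): follow parent pointers to the root; the fuel parent.length is only a totality
-- guard (a parent forest on n nodes reaches its root in fewer than n steps)
def findU (parent : List Nat) : Nat → Nat → Nat
  | 0, a => a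
  | f + 1, a =>
      let pa := parent.getD a a          -- parent[a]; every call made keeps a < parent.length
      if pa = a then a else findU parent f pa

def unionU (parent : List Nat) (a b : Nat) : List Nat :=
  let ra := findU parent parent.length a
  let rb := findU parent parent.length b
  if ra ≠ rb then parent.set ra rb else parent

def solution_alt (maps : List String) : List Int :=
  let g := maps.map String.toList                -- maps[i] = list(maps[i])
  let col := g.length
  let row := (g.headD []).length
  let parent := (List.range col).foldl (fun par (i : Nat) =>
      (List.range row).foldl (fun (par : List Nat) (j : Nat) =>
        if cellChar g (i : Int) (j : Int) = 'X' then par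
        else
          let par := if i + 1 < col ∧ cellChar g ((i : Int) + 1) (j : Int) ≠ 'X' then
              unionU par (i * row + j) ((i + 1) * row + j) else par
          if j + 1 < row ∧ cellChar g (i : Int) ((j : Int) + 1) ≠ 'X' then
              unionU par (i * row + j) (i * row + j + 1) else par) par)
    (List.range (col * row))
  let sums := (List.range col).foldl (fun d (i : Nat) =>
      (List.range row).foldl (fun (d : PySem.Dict Nat Int) (j : Nat) =>
        if cellChar g (i : Int) (j : Int) ≠ 'X' then
          let r := findU parent parent.length (i * row + j)
          d.insert r (d.getD r 0 + charVal (cellChar g (i : Int) (j : Int)))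
        else d) d)
    PySem.Dict.empty
  let answer := PySem.List.sorted sums.values (fun x => x)
  if answer ≠ [] then answer else [-1]

-- ===== PRECONDITION & SPEC =====

-- Pre_ excludes exactly the inputs where Python A raises: the empty list (IndexError on maps[0]),
-- a row shorter than the first row (IndexError), and a scanned cell that is neither a digit nor
-- 'X' (ValueError from int()); on every other input A returns normally.
def Pre_solution (maps : List String) : Prop :=
  maps ≠ [] ∧ ∀ s ∈ maps, (maps.headD "").length ≤ s.length ∧
    ((s.toList.take (maps.headD "").length).all (fun c => c.isDigit || c == 'X')) = true
instance (maps : List String) : Decidable (Pre_solution maps) := by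
  unfold Pre_solution; infer_instance

def pvWitness_solution : List String := ["9"]

def Spec_solution (maps : List String) (out : List Int) : Prop := out = solution_alt maps
instance (maps : List String) (out : List Int) : Decidable (Spec_solution maps out) := by
  unfold Spec_solution; infer_instance

-- ===== CLAIM (what is proved, stated in full; the proofs are below) =====
def Claim_equal_solution : Prop :=
  ∀ (maps : List String), Dom_solution maps → Pre_solution maps → Spec_solution maps (solution maps)

-- ===== LEMMAS AND PROOFS =====

-- The development below characterises both programs against the connectivity relation of land
-- cells: A's flood fill collects one sum per connected component (seed = first cell of the
-- component in row-major order), and B's union-find groups exactly the same components.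

-- in-bounds land cell
def okB (g : List (List Char)) (p : Int × Int) : Bool :=
  decide (0 ≤ p.1 ∧ p.1 < (g.length : Int) ∧ 0 ≤ p.2 ∧ p.2 < ((g.headD []).length : Int)) &&
  (cellChar g p.1 p.2 != 'X')

def valG (g : List (List Char)) (p : Int × Int) : Int := charVal (cellChar g p.1 p.2)

-- the neighbour tuples of a cell, in A's dx/dy order
def nbrsOf (c r : Int) : List (Int × Int) := [(c - 1, r), (c + 1, r), (c, r - 1), (c, r + 1)]

-- connectivity through land cells
inductive ReachG (g : List (List Char)) (s : Int × Int) : Int × Int → Prop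
  | base : okB g s = true → ReachG g s s
  | step {p q : Int × Int} : ReachG g s p → q ∈ nbrsOf p.1 p.2 → okB g q = true → ReachG g s q

-- all grid coordinates, as a Finset
def boxG (g : List (List Char)) : Finset (Int × Int) :=
  (Finset.range g.length ×ˢ Finset.range (g.headD []).length).image
    (fun ij => ((ij.1 : Int), (ij.2 : Int)))

-- one abstract conditional push
def push1 (g : List (List Char)) (st : List (Int × Int) × Finset (Int × Int)) (q : Int × Int) :
    List (Int × Int) × Finset (Int × Int) :=
  if okB g q = true ∧ q ∉ st.2 then (st.1 ++ [q], insert q st.2) else st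

-- abstract neighbour processing
def stepN (g : List (List Char)) (ns : List (Int × Int))
    (st : List (Int × Int) × Finset (Int × Int)) : List (Int × Int) × Finset (Int × Int) :=
  ns.foldl (push1 g) st

-- flood-fill invariant: V₀ = previously visited, W = pending worklist, V = visited, acc = sum so far
def InvF (g : List (List Char)) (s : Int × Int) (V₀ : Finset (Int × Int))
    (W : List (Int × Int)) (V : Finset (Int × Int)) (acc : Int) : Prop :=
  V₀ ⊆ V ∧ W.Nodup ∧ (∀ p ∈ W, p ∈ V \ V₀) ∧ s ∈ V \ V₀ ∧
  (∀ p ∈ V \ V₀, ReachG g s p) ∧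
  acc = ∑ p ∈ (V \ V₀) \ W.toFinset, valG g p ∧
  (∀ p ∈ V \ V₀, p ∉ W → ∀ q ∈ nbrsOf p.1 p.2, okB g q = true → q ∈ V)

-- mid-step invariant while the popped cell w's neighbours in ns are still unprocessed
def MidF (g : List (List Char)) (s : Int × Int) (V₀ : Finset (Int × Int)) (w : Int × Int)
    (ns W : List (Int × Int)) (V : Finset (Int × Int)) (acc : Int) : Prop :=
  V₀ ⊆ V ∧ W.Nodup ∧ (∀ p ∈ W, p ∈ V \ V₀) ∧ s ∈ V \ V₀ ∧
  (∀ p ∈ V \ V₀, ReachG g s p) ∧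
  acc = ∑ p ∈ (V \ V₀) \ W.toFinset, valG g p ∧
  (∀ p ∈ V \ V₀, p ∉ W → p ≠ w → ∀ q ∈ nbrsOf p.1 p.2, okB g q = true → q ∈ V) ∧
  w ∈ V \ V₀ ∧ w ∉ W ∧
  (∀ q ∈ nbrsOf w.1 w.2, q ∉ ns → okB g q = true → q ∈ V)

-- shape of A's visited matrix
def ShapeM (g : List (List Char)) (vis : List (List Bool)) : Prop :=
  vis.length = g.length ∧ ∀ r ∈ vis, r.length = (g.headD []).length

-- the set of coordinates marked in A's visited matrix
def matF (g : List (List Char)) (vis : List (List Bool)) : Finset (Int × Int) :=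
  (boxG g).filter (fun p => visGet vis p.1 p.2)

lemma mem_boxG (g : List (List Char)) (p : Int × Int) :
    p ∈ boxG g ↔ 0 ≤ p.1 ∧ p.1 < (g.length : Int) ∧ 0 ≤ p.2 ∧ p.2 < ((g.headD []).length : Int) := by
  obtain ⟨x, y⟩ := p
  simp only [boxG, Finset.mem_image, Finset.mem_product, Finset.mem_range, Prod.exists]
  constructor
  · rintro ⟨a, b, ⟨ha, hb⟩, h⟩
    simp only [Prod.mk.injEq] at h
    omega
  · rintro ⟨h1, h2, h3, h4⟩
    exact ⟨x.toNat, y.toNat, ⟨by omega, by omega⟩, by simp [Prod.ext_iff]; omega⟩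

lemma okB_mem_boxG (g : List (List Char)) (p : Int × Int) (h : okB g p = true) : p ∈ boxG g := by
  rw [mem_boxG]
  simp only [okB, Bool.and_eq_true, decide_eq_true_eq] at h
  exact h.1

lemma nbrsOf_ne (p q : Int × Int) (h : q ∈ nbrsOf p.1 p.2) : q ≠ p := by
  obtain ⟨a, b⟩ := p; obtain ⟨c, d⟩ := q
  simp only [nbrsOf, List.mem_cons, List.not_mem_nil, or_false] at h
  rcases h with h | h | h | h <;> simp_all [Prod.ext_iff]

lemma nbrsOf_symm (p q : Int × Int) (h : q ∈ nbrsOf p.1 p.2) : p ∈ nbrsOf q.1 q.2 := by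
  obtain ⟨a, b⟩ := p; obtain ⟨c, d⟩ := q
  simp only [nbrsOf, List.mem_cons, List.not_mem_nil, or_false] at h ⊢
  rcases h with h | h | h | h <;> simp_all [Prod.ext_iff]

lemma reach_ok (g : List (List Char)) (s p : Int × Int) (h : ReachG g s p) : okB g p = true := by
  induction h with
  | base h => exact h
  | step _ _ hq _ => exact hq

lemma reach_ok_src (g : List (List Char)) (s p : Int × Int) (h : ReachG g s p) : okB g s = true := by
  induction h with
  | base h => exact h
  | step _ _ _ ih => exact ih

lemma reach_trans (g : List (List Char)) (a b c : Int × Int)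
    (h1 : ReachG g a b) (h2 : ReachG g b c) : ReachG g a c := by
  induction h2 with
  | base _ => exact h1
  | step _ hn hok ih => exact ReachG.step ih hn hok

lemma reach_symm (g : List (List Char)) (a b : Int × Int) (h : ReachG g a b) : ReachG g b a := by
  induction h with
  | base h => exact ReachG.base h
  | step hre hn hok ih =>
    rename_i p q
    have hqp : ReachG g q p := ReachG.step (ReachG.base hok) (nbrsOf_symm _ _ hn) (reach_ok _ _ _ hre)
    exact reach_trans g _ _ _ hqp ih

lemma reach_disjoint (g : List (List Char)) (s : Int × Int) (V : Finset (Int × Int))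
    (hcl : ∀ p ∈ V, ∀ q ∈ nbrsOf p.1 p.2, okB g q = true → q ∈ V)
    (hs : s ∉ V) : ∀ p, ReachG g s p → p ∉ V := by
  intro p h
  induction h with
  | base _ => exact hs
  | step hre hn hok ih =>
    intro hq
    exact ih (hcl _ hq _ (nbrsOf_symm _ _ hn) (reach_ok _ _ _ hre))

lemma mid_step (g : List (List Char)) (s : Int × Int) (V₀ : Finset (Int × Int)) (w : Int × Int)
    (hre : ReachG g s w) :
    ∀ ns W V acc, (∀ q ∈ ns, q ∈ nbrsOf w.1 w.2) → MidF g s V₀ w ns W V acc →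
      MidF g s V₀ w [] (stepN g ns (W, V)).1 (stepN g ns (W, V)).2 acc ∧
      (boxG g \ (stepN g ns (W, V)).2).card + (stepN g ns (W, V)).1.length ≤
        (boxG g \ V).card + W.length := by
  intro ns
  induction ns with
  | nil => intro W V acc _ h; exact ⟨h, le_refl _⟩
  | cons q ns ih =>
    intro W V acc hns h
    obtain ⟨h1, h2, h3, h4, h5, h6, h7, h8, h9, h10⟩ := h
    have hq_nbr : q ∈ nbrsOf w.1 w.2 := hns q (List.mem_cons_self ..)
    have hstep : stepN g (q :: ns) (W, V) = stepN g ns (push1 g (W, V) q) := rfl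
    by_cases hc : okB g q = true ∧ q ∉ V
    · -- q is pushed
      have hpush : push1 g (W, V) q = (W ++ [q], insert q V) := by
        simp [push1, hc]
      have hqV : q ∉ V := hc.2
      have hqV₀ : q ∉ V₀ := fun hh => hqV (h1 hh)
      have hreq : ReachG g s q := .step hre hq_nbr hc.1
      have hqW : q ∉ W := fun hh => hqV (Finset.mem_sdiff.mp (h3 q hh)).1
      have hwq : q ≠ w := nbrsOf_ne w q hq_nbr
      have hmid : MidF g s V₀ w ns (W ++ [q]) (insert q V) acc := by
        refine ⟨h1.trans (Finset.subset_insert _ _), ?_, ?_, ?_, ?_, ?_, ?_, ?_, ?_, ?_⟩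
        · refine List.Nodup.append h2 (List.nodup_singleton q) ?_
          intro a ha hb
          simp only [List.mem_singleton] at hb
          subst hb; exact hqW ha
        · intro p hp
          rcases List.mem_append.mp hp with hp | hp
          · have := Finset.mem_sdiff.mp (h3 p hp)
            exact Finset.mem_sdiff.mpr ⟨Finset.mem_insert_of_mem this.1, this.2⟩
          · simp only [List.mem_singleton] at hp; subst hp
            exact Finset.mem_sdiff.mpr ⟨Finset.mem_insert_self _ _, hqV₀⟩
        · have := Finset.mem_sdiff.mp h4
          exact Finset.mem_sdiff.mpr ⟨Finset.mem_insert_of_mem this.1, this.2⟩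
        · intro p hp
          have := Finset.mem_sdiff.mp hp
          rcases Finset.mem_insert.mp this.1 with hh | hh
          · subst hh; exact hreq
          · exact h5 p (Finset.mem_sdiff.mpr ⟨hh, this.2⟩)
        · have hset : (insert q V \ V₀) \ (W ++ [q]).toFinset = (V \ V₀) \ W.toFinset := by
            ext r
            by_cases hr : r = q
            · subst hr
              simp [hqV]
            · simp only [Finset.mem_sdiff, Finset.mem_insert, List.toFinset_append,
                Finset.mem_union, List.toFinset_cons, List.toFinset_nil, List.mem_toFinset, hr]
              tauto
          rw [hset]; exact h6
        · intro p hp hpW hpw q' hq' hok'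
          have hpq : p ≠ q := by
            intro hh; subst hh; exact hpW (List.mem_append.mpr (Or.inr (List.mem_singleton.mpr rfl)))
          have hp' : p ∈ V \ V₀ := by
            have := Finset.mem_sdiff.mp hp
            rcases Finset.mem_insert.mp this.1 with hh | hh
            · exact absurd hh hpq
            · exact Finset.mem_sdiff.mpr ⟨hh, this.2⟩
          have hpW' : p ∉ W := fun hh => hpW (List.mem_append.mpr (Or.inl hh))
          exact Finset.mem_insert_of_mem (h7 p hp' hpW' hpw q' hq' hok')
        · have := Finset.mem_sdiff.mp h8
          exact Finset.mem_sdiff.mpr ⟨Finset.mem_insert_of_mem this.1, this.2⟩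
        · intro hh
          rcases List.mem_append.mp hh with hh | hh
          · exact h9 hh
          · simp only [List.mem_singleton] at hh; exact hwq hh.symm
        · intro q' hq'n hq'ns hok'
          by_cases hqq : q' = q
          · subst hqq; exact Finset.mem_insert_self _ _
          · have : q' ∉ q :: ns := by
              simp only [List.mem_cons, not_or]; exact ⟨hqq, hq'ns⟩
            exact Finset.mem_insert_of_mem (h10 q' hq'n this hok')
      have hmeas : (boxG g \ insert q V).card + (W ++ [q]).length = (boxG g \ V).card + W.length := by
        have hqbox : q ∈ boxG g \ V := Finset.mem_sdiff.mpr ⟨okB_mem_boxG g q hc.1, hqV⟩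
        have herase : boxG g \ insert q V = (boxG g \ V).erase q := by
          ext r
          simp only [Finset.mem_sdiff, Finset.mem_erase, Finset.mem_insert, not_or]
          tauto
        have hcard := Finset.card_erase_of_mem hqbox
        have hpos : 0 < (boxG g \ V).card := Finset.card_pos.mpr ⟨q, hqbox⟩
        rw [herase, hcard]
        simp only [List.length_append, List.length_singleton]
        omega
      obtain ⟨hA, hB⟩ := ih (W ++ [q]) (insert q V) acc
        (fun r hr => hns r (List.mem_cons_of_mem _ hr)) hmid
      rw [hstep, hpush]
      exact ⟨hA, by omega⟩
    · -- q is skipped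
      have hpush : push1 g (W, V) q = (W, V) := by
        simp only [push1, if_neg hc]
      have hmid : MidF g s V₀ w ns W V acc := by
        refine ⟨h1, h2, h3, h4, h5, h6, h7, h8, h9, ?_⟩
        intro q' hq'n hq'ns hok'
        by_cases hqq : q' = q
        · subst hqq
          rcases not_and_or.mp hc with hh | hh
          · exact absurd hok' hh
          · exact not_not.mp hh
        · have : q' ∉ q :: ns := by
            simp only [List.mem_cons, not_or]; exact ⟨hqq, hq'ns⟩
          exact h10 q' hq'n this hok'
      obtain ⟨hA, hB⟩ := ih W V acc (fun r hr => hns r (List.mem_cons_of_mem _ hr)) hmid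
      rw [hstep, hpush]
      exact ⟨hA, hB⟩

lemma step_pres (g : List (List Char)) (s : Int × Int) (V₀ : Finset (Int × Int)) (w : Int × Int)
    (W₁ W₂ : List (Int × Int)) (V : Finset (Int × Int)) (acc : Int)
    (hinv : InvF g s V₀ (W₁ ++ w :: W₂) V acc) :
    InvF g s V₀ (stepN g (nbrsOf w.1 w.2) (W₁ ++ W₂, V)).1 (stepN g (nbrsOf w.1 w.2) (W₁ ++ W₂, V)).2
        (acc + valG g w) ∧
    (boxG g \ (stepN g (nbrsOf w.1 w.2) (W₁ ++ W₂, V)).2).card +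
        (stepN g (nbrsOf w.1 w.2) (W₁ ++ W₂, V)).1.length <
      (boxG g \ V).card + (W₁ ++ w :: W₂).length := by
  obtain ⟨h1, h2, h3, h4, h5, h6, h7⟩ := hinv
  have hwfull : w ∈ W₁ ++ w :: W₂ := List.mem_append.mpr (Or.inr (List.mem_cons_self ..))
  have hw : w ∈ V \ V₀ := h3 w hwfull
  have hre : ReachG g s w := h5 w hw
  have h2' : (w :: (W₁ ++ W₂)).Nodup := List.nodup_middle.mp h2
  have hwW : w ∉ W₁ ++ W₂ := (List.nodup_cons.mp h2').1
  have hnd : (W₁ ++ W₂).Nodup := (List.nodup_cons.mp h2').2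
  have hsum : acc + valG g w = ∑ p ∈ (V \ V₀) \ (W₁ ++ W₂).toFinset, valG g p := by
    have htF : (W₁ ++ w :: W₂).toFinset = insert w (W₁ ++ W₂).toFinset := by
      ext r
      simp only [List.mem_toFinset, Finset.mem_insert, List.mem_append, List.mem_cons]
      tauto
    have hins : insert w ((V \ V₀) \ insert w (W₁ ++ W₂).toFinset)
        = (V \ V₀) \ (W₁ ++ W₂).toFinset := by
      ext r
      by_cases hr : r = w
      · subst hr
        simp only [Finset.mem_insert, Finset.mem_sdiff, List.mem_toFinset, true_or, true_iff]
        exact ⟨Finset.mem_sdiff.mp hw, hwW⟩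
      · simp only [Finset.mem_insert, Finset.mem_sdiff, List.mem_toFinset, hr, false_or]
    have hnotmem : w ∉ (V \ V₀) \ insert w (W₁ ++ W₂).toFinset := by
      simp
    rw [h6, htF, ← hins, Finset.sum_insert hnotmem]
    ring
  have hmid : MidF g s V₀ w (nbrsOf w.1 w.2) (W₁ ++ W₂) V (acc + valG g w) := by
    refine ⟨h1, hnd, ?_, h4, h5, hsum, ?_, hw, hwW, ?_⟩
    · intro p hp
      refine h3 p ?_
      rcases List.mem_append.mp hp with hh | hh
      · exact List.mem_append.mpr (Or.inl hh)
      · exact List.mem_append.mpr (Or.inr (List.mem_cons_of_mem _ hh))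
    · intro p hp hpW hpw q hq hok
      refine h7 p hp ?_ q hq hok
      intro hh
      rcases List.mem_append.mp hh with hh | hh
      · exact hpW (List.mem_append.mpr (Or.inl hh))
      · rcases List.mem_cons.mp hh with hh | hh
        · exact hpw hh
        · exact hpW (List.mem_append.mpr (Or.inr hh))
    · intro q hq hnq
      exact absurd hq hnq
  obtain ⟨hfin, hmeas⟩ := mid_step g s V₀ w hre (nbrsOf w.1 w.2) (W₁ ++ W₂) V (acc + valG g w)
    (fun q hq => hq) hmid
  obtain ⟨m1, m2, m3, m4, m5, m6, m7, m8, m9, m10⟩ := hfin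
  refine ⟨⟨m1, m2, m3, m4, m5, m6, ?_⟩, ?_⟩
  · intro p hp hpW q hq hok
    by_cases hpw : p = w
    · subst hpw
      exact m10 q hq (List.not_mem_nil) hok
    · exact m7 p hp hpW hpw q hq hok
  · have : (W₁ ++ w :: W₂).length = (W₁ ++ W₂).length + 1 := by
      simp only [List.length_append, List.length_cons]
      omega
    omega

lemma inv_final (g : List (List Char)) (s : Int × Int) (V₀ V' : Finset (Int × Int)) (acc : Int)
    (hV₀cl : ∀ p ∈ V₀, ∀ q ∈ nbrsOf p.1 p.2, okB g q = true → q ∈ V₀) (hsV₀ : s ∉ V₀)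
    (hinv : InvF g s V₀ [] V' acc) :
    (↑V' : Set (Int × Int)) = ↑V₀ ∪ {p | ReachG g s p} ∧ acc = ∑ p ∈ V' \ V₀, valG g p := by
  obtain ⟨h1, _, _, h4, h5, h6, h7⟩ := hinv
  constructor
  · ext x
    simp only [Set.mem_union, Finset.mem_coe, Set.mem_setOf_eq]
    constructor
    · intro hx
      by_cases hx0 : x ∈ V₀
      · exact Or.inl hx0
      · exact Or.inr (h5 x (Finset.mem_sdiff.mpr ⟨hx, hx0⟩))
    · rintro (hx | hx)
      · exact h1 hx
      · induction hx with
        | base _ => exact (Finset.mem_sdiff.mp h4).1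
        | step hre hn hok ih =>
          rename_i p q
          have hp : p ∈ V' := ih
          have hpR : ReachG g s p := hre
          have hp' : p ∈ V' \ V₀ :=
            Finset.mem_sdiff.mpr ⟨hp, reach_disjoint g s V₀ hV₀cl hsV₀ p hpR⟩
          exact h7 p hp' (List.not_mem_nil) q hn hok
  · simpa using h6

lemma visGet_replicate (n m : Nat) (x y : Int) :
    visGet (List.replicate n (List.replicate m false)) x y = false := by
  unfold visGet
  have houter : (List.replicate n (List.replicate m false)).getD x.toNat []
      = List.replicate (if x.toNat < n then m else 0) false := by
    rcases lt_or_ge x.toNat n with h | h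
    · simp [List.getD_eq_getElem?_getD, h]
    · simp [List.getD_eq_getElem?_getD, Nat.not_lt.mpr h]
  rw [houter, List.getD_eq_getElem?_getD, List.getElem?_replicate]
  rcases lt_or_ge y.toNat (if x.toNat < n then m else 0) with h | h
  · rw [if_pos h]; rfl
  · rw [if_neg (Nat.not_lt.mpr h)]; rfl

lemma shapeM_init (g : List (List Char)) :
    ShapeM g (List.replicate g.length (List.replicate (g.headD []).length false)) := by
  constructor
  · simp
  · intro r hr
    rw [List.eq_of_mem_replicate hr]
    simp

lemma matF_init (g : List (List Char)) :
    matF g (List.replicate g.length (List.replicate (g.headD []).length false)) = ∅ := by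
  unfold matF
  apply Finset.filter_false_of_mem
  intro p _
  simp [visGet_replicate]

lemma shapeM_visSet (g : List (List Char)) (vis : List (List Bool)) (x y : Int)
    (hxl : x.toNat < vis.length) (hsh : ShapeM g vis) : ShapeM g (visSet vis x y) := by
  obtain ⟨hlen, hrow⟩ := hsh
  have hget : vis.getD x.toNat [] = vis[x.toNat] := by
    rw [List.getD_eq_getElem?_getD, List.getElem?_eq_getElem hxl]
    rfl
  constructor
  · simpa [visSet] using hlen
  · intro r hr
    rcases List.mem_or_eq_of_mem_set hr with hh | hh
    · exact hrow r hh
    · subst hh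
      rw [List.length_set, hget]
      exact hrow _ (List.getElem_mem hxl)

lemma visGet_visSet (vis : List (List Bool)) (x y x' y' : Int)
    (hx : 0 ≤ x) (hy : 0 ≤ y) (hx' : 0 ≤ x') (hy' : 0 ≤ y')
    (hxl : x.toNat < vis.length) (hyl : y.toNat < (vis.getD x.toNat []).length) :
    visGet (visSet vis x y) x' y' =
      if (x', y') = (x, y) then true else visGet vis x' y' := by
  unfold visGet visSet
  by_cases hxx : x'.toNat = x.toNat
  · have hxeq : x' = x := by omega
    subst hxeq
    have h1 : (vis.set x'.toNat ((vis.getD x'.toNat []).set y.toNat true)).getD x'.toNat []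
        = (vis.getD x'.toNat []).set y.toNat true := by
      rw [List.getD_eq_getElem?_getD, List.getElem?_set_self (by simpa using hxl)]
      rfl
    rw [h1]
    by_cases hyy : y'.toNat = y.toNat
    · have hyeq : y' = y := by omega
      subst hyeq
      rw [List.getD_eq_getElem?_getD, List.getElem?_set_self hyl]
      simp
    · have hyne : y' ≠ y := by intro hh; exact hyy (by rw [hh])
      rw [List.getD_eq_getElem?_getD, List.getElem?_set_ne (fun hh => hyy hh.symm),
        ← List.getD_eq_getElem?_getD]
      simp [Prod.ext_iff, hyne]
  · have hxne : x' ≠ x := by intro hh; exact hxx (by rw [hh])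
    have h1 : (vis.set x.toNat ((vis.getD x.toNat []).set y.toNat true)).getD x'.toNat []
        = vis.getD x'.toNat [] := by
      rw [List.getD_eq_getElem?_getD, List.getElem?_set_ne (fun hh => hxx hh.symm),
        ← List.getD_eq_getElem?_getD]
    rw [h1]
    simp [Prod.ext_iff, hxne]

lemma matF_visSet (g : List (List Char)) (vis : List (List Bool)) (p : Int × Int)
    (hp : p ∈ boxG g) (hsh : ShapeM g vis) :
    matF g (visSet vis p.1 p.2) = insert p (matF g vis) := by
  have hb := (mem_boxG g p).mp hp
  have hxl : p.1.toNat < vis.length := by rw [hsh.1]; omega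
  have hgetrow : vis.getD p.1.toNat [] = vis[p.1.toNat] := by
    rw [List.getD_eq_getElem?_getD, List.getElem?_eq_getElem hxl]; rfl
  have hrowlen : (vis.getD p.1.toNat []).length = (g.headD []).length := by
    rw [hgetrow]; exact hsh.2 _ (List.getElem_mem hxl)
  have hyl : p.2.toNat < (vis.getD p.1.toNat []).length := by rw [hrowlen]; omega
  ext r
  simp only [matF, Finset.mem_filter, Finset.mem_insert]
  by_cases hr : r = p
  · subst hr
    rw [visGet_visSet vis r.1 r.2 r.1 r.2 (by omega) (by omega) (by omega) (by omega) hxl hyl]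
    simp [hp]
  · have hne : (r.1, r.2) ≠ (p.1, p.2) := by
      intro hh; exact hr (by obtain ⟨a, b⟩ := r; obtain ⟨c, d⟩ := p; simpa using hh)
    constructor
    · rintro ⟨hrb, hrv⟩
      have hbr := (mem_boxG g r).mp hrb
      rw [visGet_visSet vis p.1 p.2 r.1 r.2 (by omega) (by omega) (by omega) (by omega) hxl hyl,
        if_neg hne] at hrv
      exact Or.inr ⟨hrb, hrv⟩
    · rintro (hh | ⟨hrb, hrv⟩)
      · exact absurd hh hr
      · have hbr := (mem_boxG g r).mp hrb
        rw [visGet_visSet vis p.1 p.2 r.1 r.2 (by omega) (by omega) (by omega) (by omega) hxl hyl,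
          if_neg hne]
        exact ⟨hrb, hrv⟩

lemma visGet_false_iff (g : List (List Char)) (vis : List (List Bool)) (p : Int × Int)
    (hp : p ∈ boxG g) : visGet vis p.1 p.2 = false ↔ p ∉ matF g vis := by
  simp [matF, Finset.mem_filter, hp]

lemma fold_sim {σ τ γ : Type} (R : σ → τ → Prop) (f : σ → γ → σ) (g' : τ → γ → τ)
    (l : List γ) : ∀ (s : σ) (t : τ), (∀ c ∈ l, ∀ s t, R s t → R (f s c) (g' t c)) → R s t →
      R (l.foldl f s) (l.foldl g' t) := by
  induction l with
  | nil => intro s t _ h; simpa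
  | cons c l ih =>
    intro s t hstep h
    exact ih (f s c) (g' t c) (fun d hd s' t' h' => hstep d (List.mem_cons_of_mem _ hd) s' t' h')
      (hstep c (List.mem_cons_self ..) s t h)

def RA (g : List (List Char)) (st : List (Int × Int) × List (List Bool))
    (ast : List (Int × Int) × Finset (Int × Int)) : Prop :=
  ast.1 = st.1 ∧ ast.2 = matF g st.2 ∧ ShapeM g st.2

lemma bfsStep_sim (g : List (List Char)) (c r : Int) (k : Nat)
    (st : List (Int × Int) × List (List Bool)) (ast : List (Int × Int) × Finset (Int × Int))
    (hR : RA g st ast) :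
    RA g (bfsStep g (g.length : Int) ((g.headD []).length : Int) c r st k)
      (push1 g ast (c + dxA.getD k 0, r + dyA.getD k 0)) := by
  obtain ⟨hl, hV, hsh⟩ := hR
  simp only [bfsStep, push1]
  split_ifs with h1 h2 h3 h3' h4
  · have hbox : (c + dxA.getD k 0, r + dyA.getD k 0) ∈ boxG g :=
      (mem_boxG g _).mpr ⟨h1.1, h1.2.1, h1.2.2.1, h1.2.2.2⟩
    refine ⟨by simp [hl], ?_, ?_⟩
    · rw [hV]
      exact (matF_visSet g st.2 _ hbox hsh).symm ▸ rfl
    · exact shapeM_visSet g st.2 _ _ (by rw [hsh.1]; omega) hsh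
  · exfalso
    apply h3
    have hbox : (c + dxA.getD k 0, r + dyA.getD k 0) ∈ boxG g :=
      (mem_boxG g _).mpr ⟨h1.1, h1.2.1, h1.2.2.1, h1.2.2.2⟩
    constructor
    · simp only [okB, Bool.and_eq_true, decide_eq_true_eq, bne_iff_ne]
      exact ⟨⟨h1.1, h1.2.1, h1.2.2.1, h1.2.2.2⟩, h2.2⟩
    · rw [hV]
      exact (visGet_false_iff g st.2 _ hbox).mp h2.1
  · exfalso
    have hbox : (c + dxA.getD k 0, r + dyA.getD k 0) ∈ boxG g :=
      (mem_boxG g _).mpr ⟨h1.1, h1.2.1, h1.2.2.1, h1.2.2.2⟩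
    rcases not_and_or.mp h2 with hh | hh
    · have : visGet st.2 (c + dxA.getD k 0) (r + dyA.getD k 0) = true := by
        cases hvg : visGet st.2 (c + dxA.getD k 0) (r + dyA.getD k 0)
        · exact absurd hvg hh
        · rfl
      apply h3'.2
      rw [hV]
      simp only [matF, Finset.mem_filter]
      exact ⟨hbox, this⟩
    · have hx : cellChar g (c + dxA.getD k 0) (r + dyA.getD k 0) = 'X' := not_not.mp hh
      have := h3'.1
      simp only [okB, Bool.and_eq_true, bne_iff_ne] at this
      exact this.2 hx
  · exact ⟨hl, hV, hsh⟩
  · exfalso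
    have := h4.1
    simp only [okB, Bool.and_eq_true, decide_eq_true_eq] at this
    exact h1 this.1
  · exact ⟨hl, hV, hsh⟩

lemma foldA_sim (g : List (List Char)) (c r : Int)
    (st : List (Int × Int) × List (List Bool)) (ast : List (Int × Int) × Finset (Int × Int))
    (hR : RA g st ast) :
    RA g ((List.range 4).foldl (bfsStep g (g.length : Int) ((g.headD []).length : Int) c r) st)
      (stepN g (nbrsOf c r) ast) := by
  have hmap : nbrsOf c r = (List.range 4).map (fun k => (c + dxA.getD k 0, r + dyA.getD k 0)) := by
    simp [nbrsOf, dxA, dyA, List.range_succ, Prod.ext_iff]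
    omega
  rw [stepN, hmap, List.foldl_map]
  exact fold_sim (RA g) _ _ (List.range 4) st ast
    (fun k _ s t h => bfsStep_sim g c r k s t h) hR

lemma runA (g : List (List Char)) (s : Int × Int) (V₀ : Finset (Int × Int)) :
    ∀ (fuel : Nat) (W : List (Int × Int)) (vis : List (List Bool)) (num : Int),
      ShapeM g vis → InvF g s V₀ W (matF g vis) num →
      (boxG g \ matF g vis).card + W.length ≤ fuel →
      ShapeM g (bfsA g (g.length : Int) ((g.headD []).length : Int) fuel W vis num).2 ∧
      InvF g s V₀ []
        (matF g (bfsA g (g.length : Int) ((g.headD []).length : Int) fuel W vis num).2)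
        (bfsA g (g.length : Int) ((g.headD []).length : Int) fuel W vis num).1 := by
  intro fuel
  induction fuel with
  | zero =>
    intro W vis num hsh hinv hfu
    have hW : W = [] := List.length_eq_zero_iff.mp (by omega)
    subst hW
    exact ⟨hsh, hinv⟩
  | succ fuel ih =>
    intro W vis num hsh hinv hfu
    cases W with
    | nil => exact ⟨hsh, hinv⟩
    | cons p q =>
      obtain ⟨c, r⟩ := p
      have hsp := step_pres g s V₀ (c, r) [] q (matF g vis) num (by simpa using hinv)
      have hfold := foldA_sim g c r (q, vis) (q, matF g vis) ⟨rfl, rfl, hsh⟩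
      obtain ⟨ha1, ha2, ha3⟩ := hfold
      have hred : bfsA g (g.length : Int) ((g.headD []).length : Int) (fuel + 1)
          ((c, r) :: q) vis num
          = bfsA g (g.length : Int) ((g.headD []).length : Int) fuel
              ((List.range 4).foldl
                (bfsStep g (g.length : Int) ((g.headD []).length : Int) c r) (q, vis)).1
              ((List.range 4).foldl
                (bfsStep g (g.length : Int) ((g.headD []).length : Int) c r) (q, vis)).2
              (num + charVal (cellChar g c r)) := by
        simp [bfsA]
      rw [hred]
      have hst1 : (stepN g (nbrsOf c r) (q, matF g vis)).1
          = ((List.range 4).foldl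
              (bfsStep g (g.length : Int) ((g.headD []).length : Int) c r) (q, vis)).1 := ha1
      have hst2 : (stepN g (nbrsOf c r) (q, matF g vis)).2
          = matF g ((List.range 4).foldl
              (bfsStep g (g.length : Int) ((g.headD []).length : Int) c r) (q, vis)).2 := ha2
      obtain ⟨hinv', hmeas⟩ := hsp
      rw [List.nil_append] at hinv' hmeas
      rw [hst1, hst2] at hinv' hmeas
      refine ih _ _ _ ha3 hinv' ?_
      simp only [List.nil_append, List.length_cons] at hmeas
      simp only [List.length_cons] at hfu
      omega

lemma inv_init (g : List (List Char)) (s : Int × Int) (V : Finset (Int × Int))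
    (hok : okB g s = true) (hs : s ∉ V) : InvF g s V [s] (insert s V) 0 := by
  have hsd : insert s V \ V = {s} := by
    ext r
    simp only [Finset.mem_sdiff, Finset.mem_insert, Finset.mem_singleton]
    constructor
    · rintro ⟨rfl | hh, hnv⟩
      · rfl
      · exact absurd hh hnv
    · rintro rfl
      exact ⟨Or.inl rfl, hs⟩
  refine ⟨Finset.subset_insert _ _, List.nodup_singleton _, ?_, ?_, ?_, ?_, ?_⟩
  · intro p hp
    simp only [List.mem_singleton] at hp
    subst hp
    rw [hsd]; exact Finset.mem_singleton_self _
  · rw [hsd]; exact Finset.mem_singleton_self _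
  · intro p hp
    rw [hsd, Finset.mem_singleton] at hp
    subst hp
    exact ReachG.base hok
  · rw [hsd]
    have : ({s} : Finset (Int × Int)) \ [s].toFinset = ∅ := by
      simp
    rw [this, Finset.sum_empty]
  · intro p hp hpw
    rw [hsd, Finset.mem_singleton] at hp
    subst hp
    exact absurd (List.mem_singleton.mpr rfl) hpw

lemma card_boxG (g : List (List Char)) : (boxG g).card ≤ g.length * (g.headD []).length := by
  unfold boxG
  refine le_trans Finset.card_image_le ?_
  simp [Finset.card_product]

-- ===== geometry: row-major cell list and flattened ids =====

def rowN (g : List (List Char)) : Nat := (g.headD []).length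
def colN (g : List (List Char)) : Nat := g.length
def nN (g : List (List Char)) : Nat := colN g * rowN g
def cellZ (p : Nat × Nat) : Int × Int := ((p.1 : Int), (p.2 : Int))
def idN (g : List (List Char)) (p : Nat × Nat) : Nat := p.1 * rowN g + p.2
def allAB (a b : Nat) : List (Nat × Nat) :=
  (List.range a).flatMap (fun i => (List.range b).map (fun j => (i, j)))
def allC (g : List (List Char)) : List (Nat × Nat) := allAB (colN g) (rowN g)
def okN (g : List (List Char)) (p : Nat × Nat) : Bool := okB g (cellZ p)

lemma mem_allAB (a b : Nat) (p : Nat × Nat) : p ∈ allAB a b ↔ p.1 < a ∧ p.2 < b := by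
  obtain ⟨i, j⟩ := p
  simp [allAB, List.mem_flatMap, Prod.ext_iff, eq_comm]

lemma okN_iff (g : List (List Char)) (p : Nat × Nat) :
    okN g p = true ↔ p.1 < colN g ∧ p.2 < rowN g ∧ cellChar g (p.1 : Int) (p.2 : Int) ≠ 'X' := by
  simp only [okN, okB, cellZ, Bool.and_eq_true, decide_eq_true_eq, bne_iff_ne]
  constructor
  · rintro ⟨⟨_, h1, _, h2⟩, hx⟩
    exact ⟨by exact_mod_cast h1, by exact_mod_cast h2, hx⟩
  · rintro ⟨h1, h2, hx⟩
    exact ⟨⟨Int.natCast_nonneg _, by exact_mod_cast h1, Int.natCast_nonneg _,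
      by exact_mod_cast h2⟩, hx⟩

lemma pairwise_allAB (b : Nat) :
    ∀ a, (allAB a b).Pairwise (fun p q : Nat × Nat => p.1 * b + p.2 < q.1 * b + q.2) := by
  intro a
  induction a with
  | zero => simp [allAB]
  | succ a ih =>
    have hsplit : allAB (a + 1) b = allAB a b ++ (List.range b).map (fun j => (a, j)) := by
      simp [allAB, List.range_succ]
    rw [hsplit, List.pairwise_append]
    refine ⟨ih, ?_, ?_⟩
    · rw [List.pairwise_map]
      refine List.Pairwise.imp ?_ (List.pairwise_lt_range)
      intro j j' hjj
      exact Nat.add_lt_add_left hjj _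
    · intro p hp q hq
      obtain ⟨hp1, hp2⟩ := (mem_allAB a b p).mp hp
      obtain ⟨j, hj, rfl⟩ := List.mem_map.mp hq
      calc p.1 * b + p.2 < p.1 * b + b := Nat.add_lt_add_left hp2 _
        _ = (p.1 + 1) * b := (Nat.succ_mul _ _).symm
        _ ≤ a * b := Nat.mul_le_mul_right b hp1
        _ ≤ a * b + j := Nat.le_add_right _ _


lemma foldl_nested {σ : Type} (f : σ → Nat × Nat → σ) (a b : Nat) (init : σ) :
    (List.range a).foldl (fun s i => (List.range b).foldl (fun s j => f s (i, j)) s) init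
      = (allAB a b).foldl f init := by
  induction a generalizing init with
  | zero => rfl
  | succ a ih =>
    have hsplit : allAB (a + 1) b = allAB a b ++ (List.range b).map (fun j => (a, j)) := by
      simp [allAB, List.range_succ]
    rw [List.range_succ, List.foldl_append, ih, hsplit, List.foldl_append, List.foldl_cons,
      List.foldl_nil, List.foldl_map]


-- ===== connected components, seeds, per-component sums =====

noncomputable def clsN (g : List (List Char)) (p : Nat × Nat) : Finset (Int × Int) :=
  @Finset.filter _ (fun z => ReachG g (cellZ p) z) (Classical.decPred _) (boxG g)

noncomputable def sumC (g : List (List Char)) (p : Nat × Nat) : Int := ∑ z ∈ clsN g p, valG g z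

-- p is the row-major-first land cell of its component
def seedP (g : List (List Char)) (p : Nat × Nat) : Prop :=
  okN g p = true ∧ ∀ q : Nat × Nat, q.1 < colN g → q.2 < rowN g → okN g q = true →
    ReachG g (cellZ q) (cellZ p) → idN g p ≤ idN g q

noncomputable def seedB (g : List (List Char)) (p : Nat × Nat) : Bool :=
  @decide (seedP g p) (Classical.propDecidable _)

noncomputable def seeds (g : List (List Char)) : List (Nat × Nat) := (allC g).filter (seedB g)

-- the set of cells visited after A has processed the cells in `done`
noncomputable def visF (g : List (List Char)) (done : List (Nat × Nat)) : Finset (Int × Int) :=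
  @Finset.filter _ (fun z => ∃ p ∈ done, okN g p = true ∧ ReachG g (cellZ p) z)
    (Classical.decPred _) (boxG g)

-- ===== A characterised: one sum per component, in seed order =====

def stepA (g : List (List Char)) (st : List Int × List (List Bool)) (p : Nat × Nat) :
    List Int × List (List Bool) :=
  if visGet st.2 (p.1 : Int) (p.2 : Int) = false ∧ cellChar g (p.1 : Int) (p.2 : Int) ≠ 'X' then
    let out := bfsA g (g.length : Int) ((g.headD []).length : Int)
        (g.length * (g.headD []).length + 1)
        [((p.1 : Int), (p.2 : Int))] (visSet st.2 (p.1 : Int) (p.2 : Int)) 0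
    (st.1 ++ [out.1], out.2)
  else st

def AInv (g : List (List Char)) (done : List (Nat × Nat))
    (st : List Int × List (List Bool)) : Prop :=
  ShapeM g st.2 ∧ matF g st.2 = visF g done ∧ st.1 = (done.filter (seedB g)).map (sumC g)

lemma visF_closed (g : List (List Char)) (done : List (Nat × Nat)) :
    ∀ z ∈ visF g done, ∀ q ∈ nbrsOf z.1 z.2, okB g q = true → q ∈ visF g done := by
  intro z hz q hq hok
  simp only [visF, Finset.mem_filter] at hz ⊢
  obtain ⟨hbox, p, hp, hop, hre⟩ := hz
  exact ⟨okB_mem_boxG g q hok, p, hp, hop, ReachG.step hre hq hok⟩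


lemma stepA_inv (g : List (List Char)) (done : List (Nat × Nat)) (c : Nat × Nat)
    (st : List Int × List (List Bool))
    (hc1 : c.1 < colN g) (hc2 : c.2 < rowN g)
    (hF1 : ∀ q ∈ done, idN g q < idN g c)
    (hF2 : ∀ q : Nat × Nat, q.1 < colN g → q.2 < rowN g → idN g q < idN g c → q ∈ done)
    (hFb : ∀ q ∈ done, q.1 < colN g ∧ q.2 < rowN g)
    (h : AInv g done st) : AInv g (done ++ [c]) (stepA g st c) := by
  obtain ⟨hsh, hmat, hlist⟩ := h
  have hc1' : (c.1 : Int) < (g.length : Int) := by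
    have := hc1; simp only [colN] at this; exact_mod_cast this
  have hc2' : (c.2 : Int) < ((g.headD []).length : Int) := by
    have := hc2; simp only [rowN] at this; exact_mod_cast this
  have hbox : cellZ c ∈ boxG g :=
    (mem_boxG g _).mpr ⟨Int.natCast_nonneg _, hc1', Int.natCast_nonneg _, hc2'⟩
  have hcl0 : ∀ z ∈ matF g st.2, ∀ q ∈ nbrsOf z.1 z.2, okB g q = true → q ∈ matF g st.2 := by
    rw [hmat]; exact visF_closed g done
  by_cases hcond : visGet st.2 (c.1 : Int) (c.2 : Int) = false ∧
      cellChar g (c.1 : Int) (c.2 : Int) ≠ 'X'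
  · -- unvisited land cell: a fresh component is flooded
    have hokc : okN g c = true := (okN_iff g c).mpr ⟨hc1, hc2, hcond.2⟩
    have hnm : cellZ c ∉ matF g st.2 := (visGet_false_iff g st.2 (cellZ c) hbox).mp hcond.1
    have hsV₀ : cellZ c ∉ visF g done := hmat ▸ hnm
    have hinv0 : InvF g (cellZ c) (matF g st.2) [cellZ c] (insert (cellZ c) (matF g st.2)) 0 :=
      inv_init g (cellZ c) (matF g st.2) hokc hnm
    have hxl : (c.1 : Int).toNat < st.2.length := by
      rw [Int.toNat_natCast, hsh.1]; exact hc1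
    have hsh' : ShapeM g (visSet st.2 (c.1 : Int) (c.2 : Int)) :=
      shapeM_visSet g st.2 _ _ hxl hsh
    have hmat' : matF g (visSet st.2 (c.1 : Int) (c.2 : Int))
        = insert (cellZ c) (matF g st.2) := matF_visSet g st.2 (cellZ c) hbox hsh
    have hfu : (boxG g \ insert (cellZ c) (matF g st.2)).card + 1
        ≤ g.length * (g.headD []).length + 1 := by
      have hsub := Finset.card_le_card
        (Finset.sdiff_subset (s := boxG g) (t := insert (cellZ c) (matF g st.2)))
      have := card_boxG g
      omega
    obtain ⟨hshF, hinvF⟩ := runA g (cellZ c) (matF g st.2)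
      (g.length * (g.headD []).length + 1) [cellZ c]
      (visSet st.2 (c.1 : Int) (c.2 : Int)) 0 hsh' (by rw [hmat']; exact hinv0)
      (by rw [hmat']; simpa using hfu)
    obtain ⟨hset, hacc⟩ := inv_final g (cellZ c) (matF g st.2) _ _ hcl0 hnm hinvF
    -- the seed property
    have hseed : seedP g c := by
      refine ⟨hokc, ?_⟩
      intro q hq1 hq2 hoq hre
      by_contra hlt
      have hqd : q ∈ done := hF2 q hq1 hq2 (by omega)
      apply hsV₀
      simp only [visF, Finset.mem_filter]
      exact ⟨hbox, q, hqd, hoq, hre⟩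
    have hseedB : seedB g c = true := by
      rw [seedB]; exact @decide_eq_true _ (Classical.propDecidable _) hseed
    -- no cell of the new component was previously visited
    have hfresh : ∀ z, ReachG g (cellZ c) z → z ∉ visF g done := by
      intro z hz hzv
      simp only [visF, Finset.mem_filter] at hzv
      obtain ⟨hzb, p, hp, hop, hre⟩ := hzv
      apply hsV₀
      simp only [visF, Finset.mem_filter]
      exact ⟨hbox, p, hp, hop, reach_trans g _ _ _ hre (reach_symm g _ _ hz)⟩
    -- the visited set after the flood
    have hmatFinal : matF g (bfsA g (g.length : Int) ((g.headD []).length : Int)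
        (g.length * (g.headD []).length + 1) [cellZ c]
        (visSet st.2 (c.1 : Int) (c.2 : Int)) 0).2 = visF g (done ++ [c]) := by
      apply Finset.coe_injective
      rw [hset, hmat]
      ext z
      simp only [Set.mem_union, Finset.coe_filter, visF, Set.mem_setOf_eq, Finset.mem_coe,
        Finset.mem_filter]
      constructor
      · rintro (⟨hzb, p, hp, hop, hre⟩ | hz)
        · exact ⟨hzb, p, List.mem_append.mpr (Or.inl hp), hop, hre⟩
        · exact ⟨okB_mem_boxG g z (reach_ok g _ _ hz), c, List.mem_append.mpr
            (Or.inr (List.mem_singleton.mpr rfl)), hokc, hz⟩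
      · rintro ⟨hzb, p, hp, hop, hre⟩
        rcases List.mem_append.mp hp with hp | hp
        · exact Or.inl ⟨hzb, p, hp, hop, hre⟩
        · rw [List.mem_singleton.mp hp] at hre
          exact Or.inr hre
    -- the flooded sum is the component sum
    have hdiff : matF g (bfsA g (g.length : Int) ((g.headD []).length : Int)
        (g.length * (g.headD []).length + 1) [cellZ c]
        (visSet st.2 (c.1 : Int) (c.2 : Int)) 0).2 \ matF g st.2 = clsN g c := by
      ext z
      simp only [Finset.mem_sdiff, clsN, Finset.mem_filter]
      constructor
      · rintro ⟨hzin, hzout⟩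
        have : z ∈ (↑(matF g st.2) : Set (Int × Int)) ∪ {w | ReachG g (cellZ c) w} := by
          rw [← hset]; exact_mod_cast hzin
        rcases this with hz | hz
        · exact absurd (by exact_mod_cast hz) hzout
        · exact ⟨okB_mem_boxG g z (reach_ok g _ _ hz), hz⟩
      · rintro ⟨hzb, hz⟩
        have hzout : z ∉ matF g st.2 := by
          rw [hmat]; exact hfresh z hz
        have : z ∈ (↑(matF g st.2) : Set (Int × Int)) ∪ {w | ReachG g (cellZ c) w} :=
          Or.inr hz
        rw [← hset] at this
        exact ⟨by exact_mod_cast this, hzout⟩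
    have hval : (bfsA g (g.length : Int) ((g.headD []).length : Int)
        (g.length * (g.headD []).length + 1) [cellZ c]
        (visSet st.2 (c.1 : Int) (c.2 : Int)) 0).1 = sumC g c := by
      rw [hacc, hdiff, sumC]
    refine ⟨?_, ?_, ?_⟩
    · simpa only [stepA, if_pos hcond] using hshF
    · simpa only [stepA, if_pos hcond] using hmatFinal
    · show (stepA g st c).1 = ((done ++ [c]).filter (seedB g)).map (sumC g)
      simp only [stepA, if_pos hcond]
      rw [List.filter_append, List.map_append, ← hlist]
      simp only [hseedB, List.filter_cons, if_true, List.filter_nil, List.map_cons, List.map_nil]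
      exact congrArg (fun t => st.1 ++ [t]) hval
  · -- visited or water: nothing changes
    have hstep : stepA g st c = st := by
      simp only [stepA, if_neg hcond]
    have hnot : ¬ (seedP g c) ∧ visF g (done ++ [c]) = visF g done := by
      by_cases hx : cellChar g (c.1 : Int) (c.2 : Int) = 'X'
      · -- water: c is not land
        have hoc : okN g c ≠ true := by
          intro hh
          exact ((okN_iff g c).mp hh).2.2 hx
        constructor
        · intro hs; exact hoc hs.1
        · ext z
          simp only [visF, Finset.mem_filter]
          constructor
          · rintro ⟨hzb, p, hp, hop, hre⟩
            rcases List.mem_append.mp hp with hp | hp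
            · exact ⟨hzb, p, hp, hop, hre⟩
            · rw [List.mem_singleton.mp hp] at hop
              exact absurd hop hoc
          · rintro ⟨hzb, p, hp, hop, hre⟩
            exact ⟨hzb, p, List.mem_append.mpr (Or.inl hp), hop, hre⟩
      · -- land but already visited
        have hvg : visGet st.2 (c.1 : Int) (c.2 : Int) = true := by
          cases hv : visGet st.2 (c.1 : Int) (c.2 : Int)
          · exact absurd ⟨hv, hx⟩ hcond
          · rfl
        have hcv : cellZ c ∈ visF g done := by
          rw [← hmat]
          simp only [matF, Finset.mem_filter]
          exact ⟨hbox, hvg⟩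
        simp only [visF, Finset.mem_filter] at hcv
        obtain ⟨_, p, hp, hop, hre⟩ := hcv
        constructor
        · intro hs
          have hb := hFb p hp
          have := hs.2 p hb.1 hb.2 hop hre
          have := hF1 p hp
          omega
        · ext z
          simp only [visF, Finset.mem_filter]
          constructor
          · rintro ⟨hzb, p', hp', hop', hre'⟩
            rcases List.mem_append.mp hp' with hp' | hp'
            · exact ⟨hzb, p', hp', hop', hre'⟩
            · rw [List.mem_singleton.mp hp'] at hre'
              exact ⟨hzb, p, hp, hop, reach_trans g _ _ _ hre hre'⟩
          · rintro ⟨hzb, p', hp', hop', hre'⟩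
            exact ⟨hzb, p', List.mem_append.mpr (Or.inl hp'), hop', hre'⟩
    have hseedB : seedB g c = false := by
      rw [seedB]; exact @decide_eq_false _ (Classical.propDecidable _) hnot.1
    rw [hstep]
    refine ⟨hsh, ?_, ?_⟩
    · rw [hmat, hnot.2]
    · rw [List.filter_append, List.map_append, ← hlist]
      simp [hseedB]


lemma foldA_run (g : List (List Char)) :
    ∀ (rest done : List (Nat × Nat)) (st : List Int × List (List Bool)),
      allC g = done ++ rest → AInv g done st →
      AInv g (allC g) (rest.foldl (stepA g) st) := by
  intro rest
  induction rest with
  | nil =>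
    intro done st hsplit h
    rw [List.foldl_nil, hsplit, List.append_nil]
    exact h
  | cons c rest ih =>
    intro done st hsplit h
    have hpw : (allC g).Pairwise (fun p q : Nat × Nat => idN g p < idN g q) := by
      have := pairwise_allAB (rowN g) (colN g)
      simpa only [allC, allAB, idN] using this
    rw [hsplit] at hpw
    have hpwapp := List.pairwise_append.mp hpw
    have hF1 : ∀ q ∈ done, idN g q < idN g c :=
      fun q hq => hpwapp.2.2 q hq c (List.mem_cons_self ..)
    have hcmem : c ∈ allC g := by
      rw [hsplit]
      exact List.mem_append.mpr (Or.inr (List.mem_cons_self ..))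
    have hcb := (mem_allAB _ _ c).mp hcmem
    have hF2 : ∀ q : Nat × Nat, q.1 < colN g → q.2 < rowN g → idN g q < idN g c → q ∈ done := by
      intro q hq1 hq2 hlt
      have hqmem : q ∈ allC g := (mem_allAB _ _ q).mpr ⟨hq1, hq2⟩
      rw [hsplit] at hqmem
      rcases List.mem_append.mp hqmem with hh | hh
      · exact hh
      · rcases List.mem_cons.mp hh with rfl | hh
        · omega
        · have := (List.pairwise_cons.mp hpwapp.2.1).1 q hh
          omega
    have hFb : ∀ q ∈ done, q.1 < colN g ∧ q.2 < rowN g := by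
      intro q hq
      have hqm : q ∈ allC g := by
        rw [hsplit]
        exact List.mem_append.mpr (Or.inl hq)
      exact (mem_allAB _ _ q).mp hqm
    rw [List.foldl_cons]
    refine ih (done ++ [c]) (stepA g st c) ?_
      (stepA_inv g done c st hcb.1 hcb.2 hF1 hF2 hFb h)
    rw [hsplit, List.append_cons]


lemma A_unsorted (g : List (List Char)) :
    ((allC g).foldl (stepA g)
      ([], List.replicate g.length (List.replicate (g.headD []).length false))).1
    = (seeds g).map (sumC g) := by
  have hnil : visF g [] = ∅ := by
    ext z
    simp only [visF, Finset.mem_filter, Finset.notMem_empty, iff_false]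
    rintro ⟨_, p, hp, _⟩
    exact absurd hp (List.not_mem_nil)
  have hinit : AInv g []
      ([], List.replicate g.length (List.replicate (g.headD []).length false)) := by
    refine ⟨shapeM_init g, ?_, rfl⟩
    rw [matF_init g, hnil]
  have := foldA_run g (allC g) [] _ rfl hinit
  exact this.2.2


-- ===== union-find: abstract theory =====

def isFixP (par : List Nat) (x : Nat) : Prop := par.getD x x = x

def iterP (par : List Nat) : Nat → Nat → Nat
  | 0, a => a
  | k + 1, a => iterP par k (par.getD a a)

def RootedP (par : List Nat) (a : Nat) : Prop := ∃ k, isFixP par (iterP par k a)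

def GoodP (par : List Nat) (n : Nat) : Prop :=
  par.length = n ∧ (∀ a, a < n → par.getD a a < n) ∧ (∀ a, a < n → RootedP par a)

def rtP (par : List Nat) (a : Nat) : Nat := findU par par.length a

lemma iterP_add (par : List Nat) (m : Nat) :
    ∀ (k : Nat) (a : Nat), iterP par (m + k) a = iterP par m (iterP par k a) := by
  intro k
  induction k with
  | zero => intro a; rfl
  | succ k ih =>
    intro a
    show iterP par ((m + k) + 1) a = iterP par m (iterP par (k + 1) a)
    exact ih (par.getD a a)


lemma iter_fix (par : List Nat) (a : Nat) (h : isFixP par a) : ∀ k, iterP par k a = a := by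
  intro k
  induction k with
  | zero => rfl
  | succ k ih =>
    show iterP par k (par.getD a a) = a
    rw [h]; exact ih


lemma iter_lt (par : List Nat) (n : Nat) (hg : GoodP par n) (a : Nat) (ha : a < n) :
    ∀ k, iterP par k a < n := by
  intro k
  induction k generalizing a with
  | zero => exact ha
  | succ k ih =>
    show iterP par k (par.getD a a) < n
    exact ih _ (hg.2.1 a ha)


lemma findU_eq_of_fix (par : List Nat) :
    ∀ (f k a : Nat), k ≤ f → isFixP par (iterP par k a) → findU par f a = iterP par k a := by
  intro f
  induction f with
  | zero =>
    intro k a hk hfix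
    interval_cases k
    rfl
  | succ f ih =>
    intro k a hk hfix
    have hred : findU par (f + 1) a
        = if par.getD a a = a then a else findU par f (par.getD a a) := rfl
    by_cases h : par.getD a a = a
    · rw [hred, if_pos h, iter_fix par a h k]
    · have hk0 : k ≠ 0 := by
        intro hh; subst hh; exact h hfix
      obtain ⟨k', rfl⟩ := Nat.exists_eq_succ_of_ne_zero hk0
      rw [hred, if_neg h]
      exact ih k' (par.getD a a) (by omega) hfix


lemma rooted_lt (par : List Nat) (n : Nat) (hg : GoodP par n) (a : Nat) (ha : a < n) :
    ∃ k, k < n ∧ isFixP par (iterP par k a) ∧ ∀ i, i < k → ¬ isFixP par (iterP par i a) := by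
  haveI : DecidablePred (fun k => isFixP par (iterP par k a)) :=
    fun k => Classical.propDecidable _
  obtain ⟨len, hv, hr⟩ := hg
  have hex : ∃ k, isFixP par (iterP par k a) := hr a ha
  set K := Nat.find hex with hK
  have hfix : isFixP par (iterP par K a) := Nat.find_spec hex
  have hmin : ∀ i, i < K → ¬ isFixP par (iterP par i a) := fun i hi => Nat.find_min hex hi
  have hdist : ∀ i j, i < j → j ≤ K → iterP par i a ≠ iterP par j a := by
    intro i j hij hjK heq
    have h1 : iterP par ((K - j) + i) a = iterP par (K - j) (iterP par i a) :=
      iterP_add par (K - j) i a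
    have h2 : iterP par ((K - j) + j) a = iterP par (K - j) (iterP par j a) :=
      iterP_add par (K - j) j a
    have h3 : (K - j) + j = K := by omega
    have hfx : isFixP par (iterP par ((K - j) + i) a) := by
      rw [h1, heq, ← h2, h3]; exact hfix
    exact hmin _ (by omega) hfx
  have hinj : Set.InjOn (fun i => iterP par i a) ↑(Finset.range (K + 1)) := by
    intro i hi j hj heq
    simp only [Finset.coe_range, Set.mem_Iio] at hi hj
    rcases lt_trichotomy i j with h | h | h
    · exact absurd heq (hdist i j h (by omega))
    · exact h
    · exact absurd heq.symm (hdist j i h (by omega))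
  have hmaps : ∀ i ∈ Finset.range (K + 1), (fun i => iterP par i a) i ∈ Finset.range n := by
    intro i _
    exact Finset.mem_range.mpr (iter_lt par n ⟨len, hv, hr⟩ a ha i)
  have hcard := Finset.card_le_card_of_injOn _ hmaps hinj
  simp only [Finset.card_range] at hcard
  exact ⟨K, by omega, hfix, hmin⟩


lemma rt_spec (par : List Nat) (n : Nat) (hg : GoodP par n) (a : Nat) (ha : a < n) :
    isFixP par (rtP par a) ∧ rtP par a < n ∧ ∃ k, k < n ∧ iterP par k a = rtP par a := by
  obtain ⟨k, hk, hfix, _⟩ := rooted_lt par n hg a ha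
  have hlen : par.length = n := hg.1
  have heq : findU par par.length a = iterP par k a :=
    findU_eq_of_fix par par.length k a (by omega) hfix
  refine ⟨?_, ?_, k, hk, ?_⟩
  · rw [rtP, heq]; exact hfix
  · rw [rtP, heq]; exact iter_lt par n hg a ha k
  · rw [rtP, heq]


lemma rt_fix_self (par : List Nat) (n : Nat) (hg : GoodP par n) (a : Nat) (ha : a < n)
    (h : isFixP par a) : rtP par a = a := by
  have := findU_eq_of_fix par par.length 0 a (Nat.zero_le _) h
  exact this


lemma set_root_upd (par : List Nat) (n : Nat) (ra rb : Nat) (hg : GoodP par n)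
    (hra : isFixP par ra) (hrb : isFixP par rb) (hne : ra ≠ rb) (h1 : ra < n) (h2 : rb < n) :
    GoodP (par.set ra rb) n ∧
      ∀ a, a < n → rtP (par.set ra rb) a = if rtP par a = ra then rb else rtP par a := by
  obtain ⟨hlen, hval, hroot⟩ := hg
  have hralen : ra < par.length := by omega
  have ga : ∀ x, x ≠ ra → (par.set ra rb).getD x x = par.getD x x := by
    intro x hx
    rw [List.getD_eq_getElem?_getD, List.getElem?_set_ne (fun hh => hx hh.symm),
      ← List.getD_eq_getElem?_getD]
  have gb : (par.set ra rb).getD ra ra = rb := by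
    rw [List.getD_eq_getElem?_getD, List.getElem?_set_self hralen]
    rfl
  have hlen' : (par.set ra rb).length = n := by
    rw [List.length_set]; exact hlen
  have hval' : ∀ a, a < n → (par.set ra rb).getD a a < n := by
    intro a haa
    by_cases hx : a = ra
    · subst hx; rw [gb]; exact h2
    · rw [ga a hx]; exact hval a haa
  have chain_avoid : ∀ (k a : Nat), (∀ i, i < k → iterP par i a ≠ ra) →
      iterP (par.set ra rb) k a = iterP par k a := by
    intro k
    induction k with
    | zero => intro a _; rfl
    | succ k ih =>
      intro a hav
      have h0 : a ≠ ra := hav 0 (Nat.succ_pos k)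
      show iterP (par.set ra rb) k ((par.set ra rb).getD a a) = iterP par k (par.getD a a)
      rw [ga a h0]
      refine ih (par.getD a a) ?_
      intro i hi
      exact hav (i + 1) (by omega)
  -- per-element analysis
  have main : ∀ a, a < n → RootedP (par.set ra rb) a ∧
      rtP (par.set ra rb) a = if rtP par a = ra then rb else rtP par a := by
    intro a haa
    obtain ⟨k, hkn, hfix, hmin⟩ := rooted_lt par n ⟨hlen, hval, hroot⟩ a haa
    have hrt : rtP par a = iterP par k a := by
      rw [rtP]
      exact findU_eq_of_fix par par.length k a (by omega) hfix
    by_cases hr : iterP par k a = ra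
    · -- chain ends at ra; in par' one more step leads to rb, a fixpoint
      have hav : ∀ i, i < k → iterP par i a ≠ ra := by
        intro i hi heq
        exact hmin i hi (by rw [heq]; exact hra)
      have c1 : iterP (par.set ra rb) k a = ra := by
        rw [chain_avoid k a hav]; exact hr
      have c2 : iterP (par.set ra rb) (1 + k) a = rb := by
        rw [iterP_add, c1]
        show (par.set ra rb).getD ra ra = rb
        exact gb
      have hfix' : isFixP (par.set ra rb) rb := by
        show (par.set ra rb).getD rb rb = rb
        rw [ga rb (fun hh => hne hh.symm)]
        exact hrb
      have hfx2 : isFixP (par.set ra rb) (iterP (par.set ra rb) (1 + k) a) := by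
        rw [c2]; exact hfix'
      refine ⟨⟨1 + k, hfx2⟩, ?_⟩
      have : rtP (par.set ra rb) a = iterP (par.set ra rb) (1 + k) a := by
        rw [rtP]
        exact findU_eq_of_fix (par.set ra rb) (par.set ra rb).length (1 + k) a (by omega) hfx2
      rw [this, c2, if_pos (by rw [hrt]; exact hr)]
    · -- chain avoids ra entirely
      have hav : ∀ i, i ≤ k → iterP par i a ≠ ra := by
        intro i hi heq
        rcases Nat.lt_or_ge i k with hlt | hge
        · exact hmin i hlt (by rw [heq]; exact hra)
        · have : i = k := by omega
          subst this; exact hr heq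
      have c1 : iterP (par.set ra rb) k a = iterP par k a :=
        chain_avoid k a (fun i hi => hav i (by omega))
      have hfix' : isFixP (par.set ra rb) (iterP (par.set ra rb) k a) := by
        rw [c1]
        show (par.set ra rb).getD (iterP par k a) (iterP par k a) = iterP par k a
        rw [ga _ hr]
        exact hfix
      refine ⟨⟨k, hfix'⟩, ?_⟩
      have : rtP (par.set ra rb) a = iterP (par.set ra rb) k a := by
        rw [rtP]
        exact findU_eq_of_fix (par.set ra rb) (par.set ra rb).length k a (by omega) hfix'
      rw [this, c1, if_neg (by rw [hrt]; exact hr), hrt]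
  exact ⟨⟨hlen', hval', fun a haa => (main a haa).1⟩, fun a haa => (main a haa).2⟩


lemma union_spec (par : List Nat) (n : Nat) (hg : GoodP par n) (a b : Nat)
    (ha : a < n) (hb : b < n) :
    GoodP (unionU par a b) n ∧
      ∀ x, x < n → rtP (unionU par a b) x =
        if rtP par x = rtP par a then rtP par b else rtP par x := by
  have hlen : par.length = n := hg.1
  have hfa := rt_spec par n hg a ha
  have hfb := rt_spec par n hg b hb
  have hu : unionU par a b =
      if rtP par a ≠ rtP par b then par.set (rtP par a) (rtP par b) else par := rfl
  by_cases hne : rtP par a = rtP par b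
  · rw [hu, if_neg (by simpa using hne)]
    refine ⟨hg, ?_⟩
    intro x hx
    by_cases hc : rtP par x = rtP par a
    · rw [if_pos hc, hc, hne]
    · rw [if_neg hc]
  · rw [hu, if_pos (by simpa using hne)]
    exact set_root_upd par n (rtP par a) (rtP par b) hg hfa.1 hfb.1 hne hfa.2.1 hfb.2.1


-- ===== union-find applied to the grid =====

def cellO (g : List (List Char)) (u : Nat) : Int × Int :=
  ((↑(u / rowN g) : Int), (↑(u % rowN g) : Int))

def relI (g : List (List Char)) (u v : Nat) : Prop :=
  u = v ∨ (okB g (cellO g u) = true ∧ okB g (cellO g v) = true ∧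
    ReachG g (cellO g u) (cellO g v))

def stepU (g : List (List Char)) (par : List Nat) (p : Nat × Nat) : List Nat :=
  if cellChar g (p.1 : Int) (p.2 : Int) = 'X' then par
  else
    let par1 := if p.1 + 1 < colN g ∧ cellChar g ((p.1 : Int) + 1) (p.2 : Int) ≠ 'X' then
        unionU par (p.1 * rowN g + p.2) ((p.1 + 1) * rowN g + p.2) else par
    if p.2 + 1 < rowN g ∧ cellChar g (p.1 : Int) ((p.2 : Int) + 1) ≠ 'X' then
        unionU par1 (p.1 * rowN g + p.2) (p.1 * rowN g + p.2 + 1) else par1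

def parentF (g : List (List Char)) : List Nat := (allC g).foldl (stepU g) (List.range (nN g))

def P1 (g : List (List Char)) (par : List Nat) : Prop :=
  GoodP par (nN g) ∧ ∀ u, u < nN g → relI g u (rtP par u)

lemma relI_symm (g : List (List Char)) (u v : Nat) (h : relI g u v) : relI g v u := by
  rcases h with h | ⟨h1, h2, h3⟩
  · exact Or.inl h.symm
  · exact Or.inr ⟨h2, h1, reach_symm g _ _ h3⟩

lemma relI_trans (g : List (List Char)) (u v w : Nat) (h1 : relI g u v) (h2 : relI g v w) :
    relI g u w := by
  rcases h1 with h1 | ⟨a1, a2, a3⟩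
  · rw [h1]; exact h2
  · rcases h2 with h2 | ⟨b1, b2, b3⟩
    · rw [← h2]; exact Or.inr ⟨a1, a2, a3⟩
    · exact Or.inr ⟨a1, b2, reach_trans g _ _ _ a3 b3⟩

lemma union_mono (par : List Nat) (n : Nat) (hg : GoodP par n) (a b : Nat)
    (ha : a < n) (hb : b < n) (u v : Nat) (hu : u < n) (hv : v < n)
    (h : rtP par u = rtP par v) : rtP (unionU par a b) u = rtP (unionU par a b) v := by
  obtain ⟨_, hf⟩ := union_spec par n hg a b ha hb
  rw [hf u hu, hf v hv, h]

lemma union_merge (par : List Nat) (n : Nat) (hg : GoodP par n) (a b : Nat)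
    (ha : a < n) (hb : b < n) : rtP (unionU par a b) a = rtP (unionU par a b) b := by
  obtain ⟨_, hf⟩ := union_spec par n hg a b ha hb
  rw [hf a ha, hf b hb, if_pos rfl]
  by_cases hc : rtP par b = rtP par a
  · rw [if_pos hc, hc]
  · rw [if_neg hc]

lemma union_P1 (g : List (List Char)) (par : List Nat) (a b : Nat) (hp : P1 g par)
    (ha : a < nN g) (hb : b < nN g) (hab : relI g a b) : P1 g (unionU par a b) := by
  obtain ⟨hg, hrel⟩ := hp
  obtain ⟨hg', hf⟩ := union_spec par (nN g) hg a b ha hb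
  refine ⟨hg', ?_⟩
  intro u hu
  rw [hf u hu]
  by_cases hc : rtP par u = rtP par a
  · rw [if_pos hc]
    have h1 : relI g u (rtP par a) := hc ▸ hrel u hu
    have h2 : relI g (rtP par a) a := relI_symm g _ _ (hrel a ha)
    have h3 : relI g b (rtP par b) := hrel b hb
    exact relI_trans g _ _ _ (relI_trans g _ _ _ (relI_trans g _ _ _ h1 h2) hab) h3
  · rw [if_neg hc]
    exact hrel u hu

lemma idN_lt (g : List (List Char)) (p : Nat × Nat) (h1 : p.1 < colN g) (h2 : p.2 < rowN g) :
    idN g p < nN g := by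
  have h : p.1 * rowN g + p.2 < (p.1 + 1) * rowN g := by
    rw [Nat.succ_mul]; omega
  exact lt_of_lt_of_le h (Nat.mul_le_mul_right _ (by omega))


lemma cellO_idN (g : List (List Char)) (p : Nat × Nat) (h2 : p.2 < rowN g) :
    cellO g (idN g p) = cellZ p := by
  have hrow : 0 < rowN g := by omega
  have hdiv : (p.1 * rowN g + p.2) / rowN g = p.1 := by
    rw [Nat.mul_comm, Nat.mul_add_div hrow, Nat.div_eq_of_lt h2]
    omega
  have hmod : (p.1 * rowN g + p.2) % rowN g = p.2 := by
    rw [Nat.mul_comm, Nat.mul_add_mod, Nat.mod_eq_of_lt h2]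
  simp [cellO, idN, cellZ, hdiv, hmod]


lemma P1_init (g : List (List Char)) : P1 g (List.range (nN g)) := by
  have hfix : ∀ a, a < nN g → isFixP (List.range (nN g)) a := by
    intro a ha
    show (List.range (nN g)).getD a a = a
    rw [List.getD_eq_getElem?_getD, List.getElem?_range ha]
    rfl
  have hgood : GoodP (List.range (nN g)) (nN g) := by
    refine ⟨List.length_range .., ?_, ?_⟩
    · intro a ha; rw [hfix a ha]; exact ha
    · intro a ha; exact ⟨0, hfix a ha⟩
  refine ⟨hgood, ?_⟩
  intro u hu
  rw [rt_fix_self (List.range (nN g)) (nN g) hgood u hu (hfix u hu)]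
  exact Or.inl rfl


lemma okN_down (g : List (List Char)) (p : Nat × Nat) (h2 : p.2 < rowN g)
    (hd1 : p.1 + 1 < colN g) (hdc : cellChar g ((p.1 : Int) + 1) (p.2 : Int) ≠ 'X') :
    okN g (p.1 + 1, p.2) = true := by
  refine (okN_iff g _).mpr ⟨hd1, h2, ?_⟩
  show cellChar g ((p.1 + 1 : Nat) : Int) (p.2 : Int) ≠ 'X'
  push_cast
  exact hdc

lemma okN_right (g : List (List Char)) (p : Nat × Nat) (h1 : p.1 < colN g)
    (hr1 : p.2 + 1 < rowN g) (hrc : cellChar g (p.1 : Int) ((p.2 : Int) + 1) ≠ 'X') :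
    okN g (p.1, p.2 + 1) = true := by
  refine (okN_iff g _).mpr ⟨h1, hr1, ?_⟩
  show cellChar g (p.1 : Int) ((p.2 + 1 : Nat) : Int) ≠ 'X'
  push_cast
  exact hrc

lemma reach_down (g : List (List Char)) (p : Nat × Nat) (hp : okN g p = true)
    (hd : okN g (p.1 + 1, p.2) = true) : ReachG g (cellZ p) (cellZ (p.1 + 1, p.2)) := by
  refine ReachG.step (ReachG.base hp) ?_ hd
  simp only [nbrsOf, cellZ, List.mem_cons, Prod.mk.injEq]
  right; left
  push_cast
  simp

lemma reach_right (g : List (List Char)) (p : Nat × Nat) (hp : okN g p = true)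
    (hr : okN g (p.1, p.2 + 1) = true) : ReachG g (cellZ p) (cellZ (p.1, p.2 + 1)) := by
  refine ReachG.step (ReachG.base hp) ?_ hr
  simp only [nbrsOf, cellZ, List.mem_cons, Prod.mk.injEq]
  right; right; right; left
  push_cast
  simp

lemma relN (g : List (List Char)) (p q : Nat × Nat) (hp2 : p.2 < rowN g) (hq2 : q.2 < rowN g)
    (hp : okN g p = true) (hq : okN g q = true) (hre : ReachG g (cellZ p) (cellZ q)) :
    relI g (idN g p) (idN g q) := by
  right
  rw [cellO_idN g p hp2, cellO_idN g q hq2]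
  exact ⟨hp, hq, hre⟩

lemma stepU_P1 (g : List (List Char)) (par : List Nat) (p : Nat × Nat)
    (h1 : p.1 < colN g) (h2 : p.2 < rowN g) (hp : P1 g par) : P1 g (stepU g par p) := by
  by_cases hx : cellChar g (p.1 : Int) (p.2 : Int) = 'X'
  · simpa [stepU, hx] using hp
  · have hop : okN g p = true := (okN_iff g p).mpr ⟨h1, h2, hx⟩
    by_cases hd : p.1 + 1 < colN g ∧ cellChar g ((p.1 : Int) + 1) (p.2 : Int) ≠ 'X'
    · have hod : okN g (p.1 + 1, p.2) = true := okN_down g p h2 hd.1 hd.2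
      have hp1 : P1 g (unionU par (p.1 * rowN g + p.2) ((p.1 + 1) * rowN g + p.2)) :=
        union_P1 g par _ _ hp (idN_lt g p h1 h2) (idN_lt g (p.1 + 1, p.2) hd.1 h2)
          (relN g p (p.1 + 1, p.2) h2 h2 hop hod (reach_down g p hop hod))
      by_cases hr : p.2 + 1 < rowN g ∧ cellChar g (p.1 : Int) ((p.2 : Int) + 1) ≠ 'X'
      · have hor : okN g (p.1, p.2 + 1) = true := okN_right g p h1 hr.1 hr.2
        simp only [stepU, if_neg hx, if_pos hd, if_pos hr]
        exact union_P1 g _ _ _ hp1 (idN_lt g p h1 h2) (idN_lt g (p.1, p.2 + 1) h1 hr.1)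
          (relN g p (p.1, p.2 + 1) h2 hr.1 hop hor (reach_right g p hop hor))
      · simp only [stepU, if_neg hx, if_pos hd, if_neg hr]
        exact hp1
    · by_cases hr : p.2 + 1 < rowN g ∧ cellChar g (p.1 : Int) ((p.2 : Int) + 1) ≠ 'X'
      · have hor : okN g (p.1, p.2 + 1) = true := okN_right g p h1 hr.1 hr.2
        simp only [stepU, if_neg hx, if_neg hd, if_pos hr]
        exact union_P1 g par _ _ hp (idN_lt g p h1 h2) (idN_lt g (p.1, p.2 + 1) h1 hr.1)
          (relN g p (p.1, p.2 + 1) h2 hr.1 hop hor (reach_right g p hop hor))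
      · simp only [stepU, if_neg hx, if_neg hd, if_neg hr]
        exact hp


lemma stepU_mono (g : List (List Char)) (par : List Nat) (p : Nat × Nat)
    (h1 : p.1 < colN g) (h2 : p.2 < rowN g) (hg : GoodP par (nN g)) (u v : Nat)
    (hu : u < nN g) (hv : v < nN g) (h : rtP par u = rtP par v) :
    rtP (stepU g par p) u = rtP (stepU g par p) v := by
  by_cases hx : cellChar g (p.1 : Int) (p.2 : Int) = 'X'
  · simpa [stepU, hx] using h
  · by_cases hd : p.1 + 1 < colN g ∧ cellChar g ((p.1 : Int) + 1) (p.2 : Int) ≠ 'X'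
    · have hgd : GoodP (unionU par (p.1 * rowN g + p.2) ((p.1 + 1) * rowN g + p.2)) (nN g) :=
        (union_spec par (nN g) hg _ _ (idN_lt g p h1 h2) (idN_lt g (p.1 + 1, p.2) hd.1 h2)).1
      have hm1 := union_mono par (nN g) hg _ _ (idN_lt g p h1 h2)
        (idN_lt g (p.1 + 1, p.2) hd.1 h2) u v hu hv h
      by_cases hr : p.2 + 1 < rowN g ∧ cellChar g (p.1 : Int) ((p.2 : Int) + 1) ≠ 'X'
      · simp only [stepU, if_neg hx, if_pos hd, if_pos hr]
        exact union_mono _ (nN g) hgd _ _ (idN_lt g p h1 h2)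
          (idN_lt g (p.1, p.2 + 1) h1 hr.1) u v hu hv hm1
      · simp only [stepU, if_neg hx, if_pos hd, if_neg hr]
        exact hm1
    · by_cases hr : p.2 + 1 < rowN g ∧ cellChar g (p.1 : Int) ((p.2 : Int) + 1) ≠ 'X'
      · simp only [stepU, if_neg hx, if_neg hd, if_pos hr]
        exact union_mono par (nN g) hg _ _ (idN_lt g p h1 h2)
          (idN_lt g (p.1, p.2 + 1) h1 hr.1) u v hu hv h
      · simp only [stepU, if_neg hx, if_neg hd, if_neg hr]
        exact h


lemma stepU_good (g : List (List Char)) (par : List Nat) (p : Nat × Nat)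
    (h1 : p.1 < colN g) (h2 : p.2 < rowN g) (hg : GoodP par (nN g)) :
    GoodP (stepU g par p) (nN g) := by
  by_cases hx : cellChar g (p.1 : Int) (p.2 : Int) = 'X'
  · simpa [stepU, hx] using hg
  · by_cases hd : p.1 + 1 < colN g ∧ cellChar g ((p.1 : Int) + 1) (p.2 : Int) ≠ 'X'
    · have hgd : GoodP (unionU par (p.1 * rowN g + p.2) ((p.1 + 1) * rowN g + p.2)) (nN g) :=
        (union_spec par (nN g) hg _ _ (idN_lt g p h1 h2) (idN_lt g (p.1 + 1, p.2) hd.1 h2)).1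
      by_cases hr : p.2 + 1 < rowN g ∧ cellChar g (p.1 : Int) ((p.2 : Int) + 1) ≠ 'X'
      · simp only [stepU, if_neg hx, if_pos hd, if_pos hr]
        exact (union_spec _ (nN g) hgd _ _ (idN_lt g p h1 h2)
          (idN_lt g (p.1, p.2 + 1) h1 hr.1)).1
      · simp only [stepU, if_neg hx, if_pos hd, if_neg hr]
        exact hgd
    · by_cases hr : p.2 + 1 < rowN g ∧ cellChar g (p.1 : Int) ((p.2 : Int) + 1) ≠ 'X'
      · simp only [stepU, if_neg hx, if_neg hd, if_pos hr]
        exact (union_spec par (nN g) hg _ _ (idN_lt g p h1 h2)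
          (idN_lt g (p.1, p.2 + 1) h1 hr.1)).1
      · simp only [stepU, if_neg hx, if_neg hd, if_neg hr]
        exact hg


-- the two edges of cell p are merged in par
def edgeM (g : List (List Char)) (par : List Nat) (p : Nat × Nat) : Prop :=
  (p.1 + 1 < colN g → okN g p = true → okN g (p.1 + 1, p.2) = true →
    rtP par (idN g p) = rtP par (idN g (p.1 + 1, p.2))) ∧
  (p.2 + 1 < rowN g → okN g p = true → okN g (p.1, p.2 + 1) = true →
    rtP par (idN g p) = rtP par (idN g (p.1, p.2 + 1)))

lemma fold_mono (g : List (List Char)) :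
    ∀ (l : List (Nat × Nat)) (par : List Nat), (∀ p ∈ l, p.1 < colN g ∧ p.2 < rowN g) →
      GoodP par (nN g) →
      GoodP (l.foldl (stepU g) par) (nN g) ∧
      ∀ u v, u < nN g → v < nN g → rtP par u = rtP par v →
        rtP (l.foldl (stepU g) par) u = rtP (l.foldl (stepU g) par) v := by
  intro l
  induction l with
  | nil => intro par _ hg; exact ⟨hg, fun u v _ _ h => h⟩
  | cons p l ih =>
    intro par hb hg
    have hp := hb p (List.mem_cons_self ..)
    have hg' := stepU_good g par p hp.1 hp.2 hg
    obtain ⟨hgf, hmf⟩ := ih (stepU g par p) (fun q hq => hb q (List.mem_cons_of_mem _ hq)) hg'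
    refine ⟨hgf, ?_⟩
    intro u v hu hv h
    exact hmf u v hu hv (stepU_mono g par p hp.1 hp.2 hg u v hu hv h)


lemma stepU_edge (g : List (List Char)) (par : List Nat) (p : Nat × Nat)
    (h1 : p.1 < colN g) (h2 : p.2 < rowN g) (hg : GoodP par (nN g)) :
    edgeM g (stepU g par p) p := by
  constructor
  · intro hd1 hop hod
    have hx : cellChar g (p.1 : Int) (p.2 : Int) ≠ 'X' := ((okN_iff g p).mp hop).2.2
    have hdc : cellChar g ((p.1 : Int) + 1) (p.2 : Int) ≠ 'X' := by
      have := ((okN_iff g _).mp hod).2.2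
      show cellChar g ((p.1 : Int) + 1) (p.2 : Int) ≠ 'X'
      have hcast : ((p.1 + 1 : Nat) : Int) = (p.1 : Int) + 1 := by push_cast; ring
      rw [← hcast]
      exact this
    have hd : p.1 + 1 < colN g ∧ cellChar g ((p.1 : Int) + 1) (p.2 : Int) ≠ 'X' := ⟨hd1, hdc⟩
    have hgd : GoodP (unionU par (p.1 * rowN g + p.2) ((p.1 + 1) * rowN g + p.2)) (nN g) :=
      (union_spec par (nN g) hg _ _ (idN_lt g p h1 h2) (idN_lt g (p.1 + 1, p.2) hd1 h2)).1
    have hmerge : rtP (unionU par (p.1 * rowN g + p.2) ((p.1 + 1) * rowN g + p.2))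
        (idN g p) = rtP (unionU par (p.1 * rowN g + p.2) ((p.1 + 1) * rowN g + p.2))
        (idN g (p.1 + 1, p.2)) :=
      union_merge par (nN g) hg _ _ (idN_lt g p h1 h2) (idN_lt g (p.1 + 1, p.2) hd1 h2)
    by_cases hr : p.2 + 1 < rowN g ∧ cellChar g (p.1 : Int) ((p.2 : Int) + 1) ≠ 'X'
    · simp only [stepU, if_neg hx, if_pos hd, if_pos hr]
      exact union_mono _ (nN g) hgd _ _ (idN_lt g p h1 h2)
        (idN_lt g (p.1, p.2 + 1) h1 hr.1) _ _ (idN_lt g p h1 h2)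
        (idN_lt g (p.1 + 1, p.2) hd1 h2) hmerge
    · simp only [stepU, if_neg hx, if_pos hd, if_neg hr]
      exact hmerge
  · intro hr1 hop hor
    have hx : cellChar g (p.1 : Int) (p.2 : Int) ≠ 'X' := ((okN_iff g p).mp hop).2.2
    have hrc : cellChar g (p.1 : Int) ((p.2 : Int) + 1) ≠ 'X' := by
      have := ((okN_iff g _).mp hor).2.2
      have hcast : ((p.2 + 1 : Nat) : Int) = (p.2 : Int) + 1 := by push_cast; ring
      rw [← hcast]
      exact this
    have hr : p.2 + 1 < rowN g ∧ cellChar g (p.1 : Int) ((p.2 : Int) + 1) ≠ 'X' := ⟨hr1, hrc⟩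
    by_cases hd : p.1 + 1 < colN g ∧ cellChar g ((p.1 : Int) + 1) (p.2 : Int) ≠ 'X'
    · have hgd : GoodP (unionU par (p.1 * rowN g + p.2) ((p.1 + 1) * rowN g + p.2)) (nN g) :=
        (union_spec par (nN g) hg _ _ (idN_lt g p h1 h2) (idN_lt g (p.1 + 1, p.2) hd.1 h2)).1
      simp only [stepU, if_neg hx, if_pos hd, if_pos hr]
      exact union_merge _ (nN g) hgd _ _ (idN_lt g p h1 h2) (idN_lt g (p.1, p.2 + 1) h1 hr1)
    · simp only [stepU, if_neg hx, if_neg hd, if_pos hr]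
      exact union_merge par (nN g) hg _ _ (idN_lt g p h1 h2) (idN_lt g (p.1, p.2 + 1) h1 hr1)


lemma fold_edges (g : List (List Char)) :
    ∀ (l : List (Nat × Nat)) (par : List Nat), (∀ p ∈ l, p.1 < colN g ∧ p.2 < rowN g) →
      GoodP par (nN g) → ∀ p ∈ l, edgeM g (l.foldl (stepU g) par) p := by
  intro l
  induction l with
  | nil => intro par _ _ p hp; exact absurd hp (List.not_mem_nil)
  | cons c l ih =>
    intro par hb hg p hp
    have hc := hb c (List.mem_cons_self ..)
    have hg' := stepU_good g par c hc.1 hc.2 hg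
    rcases List.mem_cons.mp hp with rfl | hp
    · have he := stepU_edge g par p hc.1 hc.2 hg
      obtain ⟨hgf, hmf⟩ := fold_mono g l (stepU g par p)
        (fun q hq => hb q (List.mem_cons_of_mem _ hq)) hg'
      constructor
      · intro hd1 hop hod
        exact hmf _ _ (idN_lt g p hc.1 hc.2) (idN_lt g (p.1 + 1, p.2) hd1 hc.2)
          (he.1 hd1 hop hod)
      · intro hr1 hop hor
        exact hmf _ _ (idN_lt g p hc.1 hc.2) (idN_lt g (p.1, p.2 + 1) hc.1 hr1)
          (he.2 hr1 hop hor)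
    · exact ih (stepU g par c) (fun q hq => hb q (List.mem_cons_of_mem _ hq)) hg' p hp


lemma fold_P1 (g : List (List Char)) :
    ∀ (l : List (Nat × Nat)) (par : List Nat), (∀ p ∈ l, p.1 < colN g ∧ p.2 < rowN g) →
      P1 g par → P1 g (l.foldl (stepU g) par) := by
  intro l
  induction l with
  | nil => intro par _ hp; exact hp
  | cons c l ih =>
    intro par hb hp
    have hc := hb c (List.mem_cons_self ..)
    exact ih (stepU g par c) (fun q hq => hb q (List.mem_cons_of_mem _ hq))
      (stepU_P1 g par c hc.1 hc.2 hp)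


lemma allC_bounds (g : List (List Char)) :
    ∀ q ∈ allC g, q.1 < colN g ∧ q.2 < rowN g := fun q hq => (mem_allAB _ _ q).mp hq

lemma parentF_edges (g : List (List Char)) : ∀ c ∈ allC g, edgeM g (parentF g) c :=
  fold_edges g (allC g) (List.range (nN g)) (allC_bounds g) (P1_init g).1

-- two adjacent land cells get the same root
lemma adj_rt (g : List (List Char)) (u w : Nat × Nat) (hu : okN g u = true)
    (hw : okN g w = true) (hadj : cellZ w ∈ nbrsOf (cellZ u).1 (cellZ u).2) :
    rtP (parentF g) (idN g u) = rtP (parentF g) (idN g w) := by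
  obtain ⟨u1, u2⟩ := u
  obtain ⟨w1, w2⟩ := w
  have hub := (okN_iff g (u1, u2)).mp hu
  have hwb := (okN_iff g (w1, w2)).mp hw
  simp only [nbrsOf, cellZ, List.mem_cons, Prod.mk.injEq, List.not_mem_nil, or_false] at hadj
  rcases hadj with ⟨e1, e2⟩ | ⟨e1, e2⟩ | ⟨e1, e2⟩ | ⟨e1, e2⟩
  · -- w is the up neighbour: u = (w1 + 1, w2)
    have he : (u1, u2) = (w1 + 1, w2) := by simp [Prod.ext_iff]; omega
    rw [he] at hu ⊢
    have hmem : (w1, w2) ∈ allC g := (mem_allAB _ _ _).mpr ⟨hwb.1, hwb.2.1⟩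
    have hcol : w1 + 1 < colN g := by omega
    exact ((parentF_edges g (w1, w2) hmem).1 hcol hw hu).symm
  · -- w is the down neighbour
    have he : (w1, w2) = (u1 + 1, u2) := by simp [Prod.ext_iff]; omega
    rw [he] at hw ⊢
    have hmem : (u1, u2) ∈ allC g := (mem_allAB _ _ _).mpr ⟨hub.1, hub.2.1⟩
    have hcol : u1 + 1 < colN g := by omega
    exact (parentF_edges g (u1, u2) hmem).1 hcol hu hw
  · -- w is the left neighbour: u = (w1, w2 + 1)
    have he : (u1, u2) = (w1, w2 + 1) := by simp [Prod.ext_iff]; omega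
    rw [he] at hu ⊢
    have hmem : (w1, w2) ∈ allC g := (mem_allAB _ _ _).mpr ⟨hwb.1, hwb.2.1⟩
    have hrow : w2 + 1 < rowN g := by omega
    exact ((parentF_edges g (w1, w2) hmem).2 hrow hw hu).symm
  · -- w is the right neighbour
    have he : (w1, w2) = (u1, u2 + 1) := by simp [Prod.ext_iff]; omega
    rw [he] at hw ⊢
    have hmem : (u1, u2) ∈ allC g := (mem_allAB _ _ _).mpr ⟨hub.1, hub.2.1⟩
    have hrow : u2 + 1 < rowN g := by omega
    exact (parentF_edges g (u1, u2) hmem).2 hrow hu hw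

-- main correspondence: equal roots ⟺ connected, for land cells
lemma rt_iff_reach (g : List (List Char)) (p q : Nat × Nat)
    (hp1 : p.1 < colN g) (hp2 : p.2 < rowN g) (hq1 : q.1 < colN g) (hq2 : q.2 < rowN g)
    (hop : okN g p = true) (hoq : okN g q = true) :
    rtP (parentF g) (idN g p) = rtP (parentF g) (idN g q) ↔ ReachG g (cellZ p) (cellZ q) := by
  have hP1 : P1 g (parentF g) :=
    fold_P1 g (allC g) (List.range (nN g)) (allC_bounds g) (P1_init g)
  constructor
  · intro heq
    have r1 := hP1.2 (idN g p) (idN_lt g p hp1 hp2)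
    have r2 := hP1.2 (idN g q) (idN_lt g q hq1 hq2)
    rw [heq] at r1
    rcases relI_trans g _ _ _ r1 (relI_symm g _ _ r2) with heqid | ⟨_, _, hre⟩
    · have hcz : cellZ p = cellZ q := by
        rw [← cellO_idN g p hp2, ← cellO_idN g q hq2, heqid]
      rw [hcz]
      exact ReachG.base hoq
    · rw [cellO_idN g p hp2, cellO_idN g q hq2] at hre
      exact hre
  · intro hre
    have main : ∀ w, ReachG g (cellZ p) w →
        rtP (parentF g) (idN g p) = rtP (parentF g) (idN g (w.1.toNat, w.2.toNat)) := by
      intro w hw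
      induction hw with
      | base _ =>
        simp only [cellZ, Int.toNat_natCast]
      | step hre2 hn hok ih =>
        rename_i v w'
        have hv : okB g v = true := reach_ok g _ _ hre2
        have hvb := (mem_boxG g v).mp (okB_mem_boxG g v hv)
        have hwb := (mem_boxG g w').mp (okB_mem_boxG g w' hok)
        have hcv : cellZ (v.1.toNat, v.2.toNat) = v := by
          obtain ⟨a, b⟩ := v
          simp only [cellZ, Prod.mk.injEq]
          constructor <;> [exact Int.toNat_of_nonneg hvb.1; exact Int.toNat_of_nonneg hvb.2.2.1]
        have hcw : cellZ (w'.1.toNat, w'.2.toNat) = w' := by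
          obtain ⟨a, b⟩ := w'
          simp only [cellZ, Prod.mk.injEq]
          constructor <;> [exact Int.toNat_of_nonneg hwb.1; exact Int.toNat_of_nonneg hwb.2.2.1]
        rw [ih]
        refine adj_rt g (v.1.toNat, v.2.toNat) (w'.1.toNat, w'.2.toNat) ?_ ?_ ?_
        · show okB g (cellZ (v.1.toNat, v.2.toNat)) = true
          rw [hcv]; exact hv
        · show okB g (cellZ (w'.1.toNat, w'.2.toNat)) = true
          rw [hcw]; exact hok
        · rw [hcv, hcw]; exact hn
    have := main (cellZ q) hre
    simpa only [cellZ, Int.toNat_natCast] using this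


-- ===== B's dict of per-root sums =====

def valN (g : List (List Char)) (p : Nat × Nat) : Int := charVal (cellChar g (p.1 : Int) (p.2 : Int))
def landB (g : List (List Char)) (p : Nat × Nat) : Bool :=
  decide (cellChar g (p.1 : Int) (p.2 : Int) ≠ 'X')
def Lland (g : List (List Char)) : List (Nat × Nat) := (allC g).filter (landB g)

lemma foldl_guard {σ α : Type} (c : α → Prop) [DecidablePred c] (f : σ → α → σ) :
    ∀ (l : List α) (s : σ),
      l.foldl (fun s x => if c x then f s x else s) s = (l.filter (fun x => decide (c x))).foldl f s := by
  intro l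
  induction l with
  | nil => intro s; rfl
  | cons x l ih =>
    intro s
    by_cases h : c x
    · simp only [List.foldl_cons, List.filter_cons, decide_eq_true_eq, if_pos h, ih]
    · simp only [List.foldl_cons, List.filter_cons, decide_eq_true_eq, if_neg h, ih]


lemma getD_foldl_insert_sum {α : Type} (k : α → Nat) (v : α → Int) :
    ∀ (l : List α) (d : PySem.Dict Nat Int) (r : Nat),
      (l.foldl (fun d x => d.insert (k x) (d.getD (k x) 0 + v x)) d).getD r 0
        = d.getD r 0 + ((l.filter (fun x => decide (k x = r))).map v).sum := by
  intro l
  induction l with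
  | nil => intro d r; simp
  | cons x l ih =>
    intro d r
    rw [List.foldl_cons, ih]
    by_cases h : k x = r
    · subst h
      rw [PySem.Dict.getD_insert, if_pos rfl, List.filter_cons, if_pos (by simp),
        List.map_cons, List.sum_cons]
      ring
    · rw [PySem.Dict.getD_insert]
      simp only [List.filter_cons]
      rw [if_neg (fun hh : r = k x => h hh.symm)]
      have : (decide (k x = r)) = false := by simpa using h
      rw [this]
      simp


lemma values_foldl_insert_sum {α : Type} (k : α → Nat) (v : α → Int) (l : List α) :
    (l.foldl (fun d x => d.insert (k x) (d.getD (k x) 0 + v x)) PySem.Dict.empty).values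
      = (PySem.Set.ofList (l.map k)).map
          (fun r => (0 : Int) + ((l.filter (fun x => decide (k x = r))).map v).sum) := by
  have hnd : (l.foldl (fun d x => d.insert (k x) (d.getD (k x) 0 + v x))
      PySem.Dict.empty).keys.Nodup := by
    refine PySem.Dict.nodup_keys_foldl_insert_key l k _ PySem.Dict.empty ?_
    simp [PySem.Dict.keys_empty]
  have hkeys : (l.foldl (fun d x => d.insert (k x) (d.getD (k x) 0 + v x))
      PySem.Dict.empty).keys = PySem.Set.ofList (l.map k) := by
    rw [PySem.Dict.keys_foldl_insert_key]
    rfl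
  rw [PySem.Dict.values_eq_map_keys _ hnd 0, hkeys]
  refine List.map_congr_left ?_
  intro r _
  rw [getD_foldl_insert_sum k v l PySem.Dict.empty r]
  simp


-- ===== assembly =====

def keyR (g : List (List Char)) (p : Nat × Nat) : Nat :=
  findU (parentF g) (parentF g).length (idN g p)

def dStep (g : List (List Char)) (par : List Nat) (d : PySem.Dict Nat Int) (p : Nat × Nat) :
    PySem.Dict Nat Int :=
  if cellChar g (p.1 : Int) (p.2 : Int) ≠ 'X' then
    d.insert (findU par par.length (idN g p))
      (d.getD (findU par par.length (idN g p)) 0 + charVal (cellChar g (p.1 : Int) (p.2 : Int)))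
  else d

lemma mem_Lland (g : List (List Char)) (p : Nat × Nat) : p ∈ Lland g ↔ okN g p = true := by
  rw [okN_iff]
  simp [Lland, List.mem_filter, mem_allAB, landB, allC, and_assoc]

lemma allC_nodup (g : List (List Char)) : (allC g).Nodup := by
  have hpw : (allC g).Pairwise (fun p q : Nat × Nat => idN g p < idN g q) := by
    have := pairwise_allAB (rowN g) (colN g)
    simpa only [allC, allAB, idN] using this
  refine hpw.imp ?_
  intro a b h heq
  subst heq
  exact absurd h (lt_irrefl _)

lemma cellZ_inj : Function.Injective cellZ := by
  intro a b h
  simp only [cellZ, Prod.mk.injEq, Nat.cast_inj] at h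
  exact Prod.ext h.1 h.2

lemma seedP_of_mem_seeds (g : List (List Char)) (p : Nat × Nat) (h : p ∈ seeds g) :
    seedP g p ∧ p.1 < colN g ∧ p.2 < rowN g := by
  simp only [seeds, List.mem_filter] at h
  exact ⟨@of_decide_eq_true _ (Classical.propDecidable _) h.2, (mem_allAB _ _ p).mp h.1⟩

lemma exists_seed (g : List (List Char)) (q : Nat × Nat) (hq1 : q.1 < colN g)
    (hq2 : q.2 < rowN g) (hoq : okN g q = true) :
    ∃ s ∈ seeds g, ReachG g (cellZ q) (cellZ s) := by
  have hqbox : cellZ q ∈ boxG g := okB_mem_boxG g (cellZ q) hoq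
  have hne : (clsN g q).Nonempty := by
    refine ⟨cellZ q, ?_⟩
    simp only [clsN, Finset.mem_filter]
    exact ⟨hqbox, ReachG.base hoq⟩
  obtain ⟨m, hm, hmin⟩ := Finset.exists_min_image (clsN g q)
    (fun z => z.1.toNat * rowN g + z.2.toNat) hne
  simp only [clsN, Finset.mem_filter] at hm
  have hmok : okB g m = true := reach_ok g _ _ hm.2
  have hmb := (mem_boxG g m).mp hm.1
  have hcs : cellZ (m.1.toNat, m.2.toNat) = m := by
    obtain ⟨a, b⟩ := m
    simp only [cellZ, Prod.mk.injEq]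
    exact ⟨Int.toNat_of_nonneg hmb.1, Int.toNat_of_nonneg hmb.2.2.1⟩
  have hs1 : m.1.toNat < colN g := by
    have := hmb.2.1; simp only [colN]; omega
  have hs2 : m.2.toNat < rowN g := by
    have := hmb.2.2.2; simp only [rowN]; omega
  have hoks : okN g (m.1.toNat, m.2.toNat) = true := by
    show okB g (cellZ (m.1.toNat, m.2.toNat)) = true
    rw [hcs]; exact hmok
  have hseed : seedP g (m.1.toNat, m.2.toNat) := by
    refine ⟨hoks, ?_⟩
    intro q' h1 h2 hoq' hre'
    have hre'' : ReachG g (cellZ q') m := by rw [← hcs]; exact hre'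
    have hq'cls : cellZ q' ∈ clsN g q := by
      simp only [clsN, Finset.mem_filter]
      exact ⟨okB_mem_boxG g _ (reach_ok_src g _ _ hre'),
        reach_trans g _ _ _ hm.2 (reach_symm g _ _ hre'')⟩
    have := hmin (cellZ q') hq'cls
    simp only [cellZ, Int.toNat_natCast] at this
    simpa [idN] using this
  refine ⟨(m.1.toNat, m.2.toNat), ?_, ?_⟩
  · simp only [seeds, List.mem_filter]
    refine ⟨(mem_allAB _ _ _).mpr ⟨hs1, hs2⟩, ?_⟩
    rw [seedB]
    exact @decide_eq_true _ (Classical.propDecidable _) hseed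
  · rw [hcs]; exact hm.2

lemma keyR_eq_iff (g : List (List Char)) (p q : Nat × Nat)
    (hp1 : p.1 < colN g) (hp2 : p.2 < rowN g) (hq1 : q.1 < colN g) (hq2 : q.2 < rowN g)
    (hop : okN g p = true) (hoq : okN g q = true) :
    keyR g p = keyR g q ↔ ReachG g (cellZ p) (cellZ q) :=
  rt_iff_reach g p q hp1 hp2 hq1 hq2 hop hoq

lemma seeds_key_nodup (g : List (List Char)) : ((seeds g).map (keyR g)).Nodup := by
  refine List.Nodup.map_on ?_ (List.Nodup.filter _ (allC_nodup g))
  intro x hx y hy hkey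
  obtain ⟨hsx, hx1, hx2⟩ := seedP_of_mem_seeds g x hx
  obtain ⟨hsy, hy1, hy2⟩ := seedP_of_mem_seeds g y hy
  have hre := (keyR_eq_iff g x y hx1 hx2 hy1 hy2 hsx.1 hsy.1).mp hkey
  have h1 := hsy.2 x hx1 hx2 hsx.1 hre
  have h2 := hsx.2 y hy1 hy2 hsy.1 (reach_symm g _ _ hre)
  have hid : idN g x = idN g y := le_antisymm h2 h1
  apply cellZ_inj
  rw [← cellO_idN g x hx2, ← cellO_idN g y hy2, hid]

lemma K_perm (g : List (List Char)) :
    (PySem.Set.ofList ((Lland g).map (keyR g))).Perm ((seeds g).map (keyR g)) := by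
  refine List.perm_of_nodup_nodup_toFinset_eq (PySem.Set.nodup_ofList _) (seeds_key_nodup g) ?_
  ext r
  simp only [List.mem_toFinset, PySem.Set.mem_ofList, List.mem_map]
  constructor
  · rintro ⟨q, hq, rfl⟩
    have hoq := (mem_Lland g q).mp hq
    obtain ⟨hq1, hq2, _⟩ := (okN_iff g q).mp hoq
    obtain ⟨t, ht, hre⟩ := exists_seed g q hq1 hq2 hoq
    obtain ⟨hst, ht1, ht2⟩ := seedP_of_mem_seeds g t ht
    exact ⟨t, ht, (keyR_eq_iff g t q ht1 ht2 hq1 hq2 hst.1 hoq).mpr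
      (reach_symm g _ _ hre)⟩
  · rintro ⟨t, ht, rfl⟩
    obtain ⟨hst, _, _⟩ := seedP_of_mem_seeds g t ht
    exact ⟨t, (mem_Lland g t).mpr hst.1, rfl⟩

lemma F_eq_sumC (g : List (List Char)) (p : Nat × Nat)
    (hp1 : p.1 < colN g) (hp2 : p.2 < rowN g) (hop : okN g p = true) :
    (((Lland g).filter (fun x => decide (keyR g x = keyR g p))).map (valN g)).sum
      = sumC g p := by
  have hfc : (Lland g).filter (fun x => decide (keyR g x = keyR g p))
      = (Lland g).filter
          (fun x => @decide (ReachG g (cellZ p) (cellZ x)) (Classical.propDecidable _)) := by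
    refine List.filter_congr ?_
    intro x hx
    have hox := (mem_Lland g x).mp hx
    obtain ⟨hx1, hx2, _⟩ := (okN_iff g x).mp hox
    refine (@decide_eq_decide (keyR g x = keyR g p) (ReachG g (cellZ p) (cellZ x)) _
      (Classical.propDecidable _)).mpr ?_
    refine Iff.trans (keyR_eq_iff g x p hx1 hx2 hp1 hp2 hox hop) ?_
    exact ⟨reach_symm g _ _, reach_symm g _ _⟩
  rw [hfc]
  have hnodup : ((Lland g).filter
      (fun x => @decide (ReachG g (cellZ p) (cellZ x)) (Classical.propDecidable _))).Nodup :=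
    List.Nodup.filter _ (List.Nodup.filter _ (allC_nodup g))
  have hmapnd : (((Lland g).filter
      (fun x => @decide (ReachG g (cellZ p) (cellZ x)) (Classical.propDecidable _))).map
      cellZ).Nodup := hnodup.map cellZ_inj
  have htf : (((Lland g).filter
      (fun x => @decide (ReachG g (cellZ p) (cellZ x)) (Classical.propDecidable _))).map
      cellZ).toFinset = clsN g p := by
    ext z
    simp only [List.mem_toFinset, List.mem_map, List.mem_filter, clsN, Finset.mem_filter]
    constructor
    · rintro ⟨x, ⟨hxl, hxd⟩, rfl⟩
      have hre := @of_decide_eq_true _ (Classical.propDecidable _) hxd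
      exact ⟨okB_mem_boxG g _ (reach_ok g _ _ hre), hre⟩
    · rintro ⟨hzb, hre⟩
      have hzbb := (mem_boxG g z).mp hzb
      have hcz : cellZ (z.1.toNat, z.2.toNat) = z := by
        obtain ⟨a, b⟩ := z
        simp only [cellZ, Prod.mk.injEq]
        exact ⟨Int.toNat_of_nonneg hzbb.1, Int.toNat_of_nonneg hzbb.2.2.1⟩
      refine ⟨(z.1.toNat, z.2.toNat), ⟨?_, ?_⟩, hcz⟩
      · refine (mem_Lland g _).mpr ?_
        show okB g (cellZ (z.1.toNat, z.2.toNat)) = true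
        rw [hcz]
        exact reach_ok g _ _ hre
      · exact @decide_eq_true _ (Classical.propDecidable _) (by rw [hcz]; exact hre)
  have hcomp : (((Lland g).filter
      (fun x => @decide (ReachG g (cellZ p) (cellZ x)) (Classical.propDecidable _))).map
      (valN g)).sum
      = ((((Lland g).filter
          (fun x => @decide (ReachG g (cellZ p) (cellZ x)) (Classical.propDecidable _))).map
          cellZ).map (valG g)).sum := by
    rw [List.map_map]
    rfl
  rw [hcomp, ← List.sum_toFinset _ hmapnd, htf, sumC]

lemma sol_eq (maps : List String) : solution maps = solution_alt maps := by
  set g := maps.map String.toList with hg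
  have eA : (List.range (colN g)).foldl
        (fun st (i : Nat) => (List.range (rowN g)).foldl
          (fun (st : List Int × List (List Bool)) (j : Nat) => stepA g st (i, j)) st)
        ([], List.replicate (colN g) (List.replicate (rowN g) false))
      = (allC g).foldl (stepA g)
        ([], List.replicate (colN g) (List.replicate (rowN g) false)) :=
    foldl_nested (stepA g) (colN g) (rowN g) _
  have hAlist : ((allC g).foldl (stepA g)
      ([], List.replicate (colN g) (List.replicate (rowN g) false))).1
      = (seeds g).map (sumC g) := A_unsorted g
  have eP : (List.range (colN g)).foldl
        (fun par (i : Nat) => (List.range (rowN g)).foldl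
          (fun (par : List Nat) (j : Nat) => stepU g par (i, j)) par)
        (List.range (nN g)) = parentF g := foldl_nested (stepU g) (colN g) (rowN g) _
  have eD : (List.range (colN g)).foldl
        (fun d (i : Nat) => (List.range (rowN g)).foldl
          (fun (d : PySem.Dict Nat Int) (j : Nat) => dStep g (parentF g) d (i, j)) d)
        PySem.Dict.empty
      = (allC g).foldl (dStep g (parentF g)) PySem.Dict.empty :=
    foldl_nested (dStep g (parentF g)) (colN g) (rowN g) _
  have eG : (allC g).foldl (dStep g (parentF g)) PySem.Dict.empty
      = (Lland g).foldl
          (fun d p => d.insert (keyR g p) (d.getD (keyR g p) 0 + valN g p))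
          PySem.Dict.empty :=
    foldl_guard (fun p : Nat × Nat => cellChar g (p.1 : Int) (p.2 : Int) ≠ 'X')
      (fun d p => d.insert (keyR g p) (d.getD (keyR g p) 0 + valN g p)) (allC g)
      PySem.Dict.empty
  have hVals : ((Lland g).foldl
        (fun d p => d.insert (keyR g p) (d.getD (keyR g p) 0 + valN g p))
        PySem.Dict.empty).values
      = (PySem.Set.ofList ((Lland g).map (keyR g))).map
          (fun r => (0 : Int) +
            (((Lland g).filter (fun x => decide (keyR g x = r))).map (valN g)).sum) :=
    values_foldl_insert_sum (keyR g) (valN g) (Lland g)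
  have hmapF : ((seeds g).map (keyR g)).map
        (fun r => (0 : Int) +
          (((Lland g).filter (fun x => decide (keyR g x = r))).map (valN g)).sum)
      = (seeds g).map (sumC g) := by
    rw [List.map_map]
    refine List.map_congr_left ?_
    intro t ht
    obtain ⟨hst, h1, h2⟩ := seedP_of_mem_seeds g t ht
    show (0 : Int) +
        (((Lland g).filter (fun x => decide (keyR g x = keyR g t))).map (valN g)).sum
      = sumC g t
    rw [zero_add, F_eq_sumC g t h1 h2 hst.1]
  have hperm : ((allC g).foldl (dStep g (parentF g)) PySem.Dict.empty).values.Perm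
      ((seeds g).map (sumC g)) := by
    rw [eG, hVals, ← hmapF]
    exact (K_perm g).map _
  show (if ((List.range (colN g)).foldl
        (fun st (i : Nat) => (List.range (rowN g)).foldl
          (fun (st : List Int × List (List Bool)) (j : Nat) => stepA g st (i, j)) st)
        ([], List.replicate (colN g) (List.replicate (rowN g) false))).1 = [] then [-1]
        else PySem.List.sorted ((List.range (colN g)).foldl
        (fun st (i : Nat) => (List.range (rowN g)).foldl
          (fun (st : List Int × List (List Bool)) (j : Nat) => stepA g st (i, j)) st)
        ([], List.replicate (colN g) (List.replicate (rowN g) false))).1 (fun x => x))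
      = (if PySem.List.sorted ((List.range (colN g)).foldl
        (fun d (i : Nat) => (List.range (rowN g)).foldl
          (fun (d : PySem.Dict Nat Int) (j : Nat) => dStep g ((List.range (colN g)).foldl
        (fun par (i : Nat) => (List.range (rowN g)).foldl
          (fun (par : List Nat) (j : Nat) => stepU g par (i, j)) par)
        (List.range (nN g))) d (i, j)) d)
        PySem.Dict.empty).values (fun x => x) ≠ []
         then PySem.List.sorted ((List.range (colN g)).foldl
        (fun d (i : Nat) => (List.range (rowN g)).foldl
          (fun (d : PySem.Dict Nat Int) (j : Nat) => dStep g ((List.range (colN g)).foldl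
        (fun par (i : Nat) => (List.range (rowN g)).foldl
          (fun (par : List Nat) (j : Nat) => stepU g par (i, j)) par)
        (List.range (nN g))) d (i, j)) d)
        PySem.Dict.empty).values (fun x => x) else [-1])
  rw [eA, hAlist, eP, eD]
  by_cases hL : (seeds g).map (sumC g) = []
  · rw [if_pos hL]
    have hV : ((allC g).foldl (dStep g (parentF g)) PySem.Dict.empty).values = [] := by
      rw [← List.perm_nil]
      rw [hL] at hperm
      exact hperm
    rw [hV]
    have hse : PySem.List.sorted ([] : List Int) (fun x => x) = [] := rfl
    rw [hse]
    simp
  · rw [if_neg hL]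
    have hV : ((allC g).foldl (dStep g (parentF g)) PySem.Dict.empty).values ≠ [] := by
      intro hh
      rw [hh] at hperm
      exact hL (List.perm_nil.mp hperm.symm)
    have hsne : PySem.List.sorted
        ((allC g).foldl (dStep g (parentF g)) PySem.Dict.empty).values (fun x => x) ≠ [] := by
      rw [Ne, PySem.List.sorted_eq_nil_iff]
      exact hV
    rw [if_pos hsne]
    exact (PySem.List.sorted_id_eq_sorted_id_iff_perm _ _).mpr hperm.symm


-- ===== VERDICT (by name: the statement is the Claim_ definition above) =====
theorem solution_spec : Claim_equal_solution := by
  intro maps _ _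
  unfold Spec_solution
  exact sol_eq maps
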